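-- pv_equiv track=rewrite | github.com/Jyoungjo/Algorithm_python | 프로그래머스/2/250136. ［PCCP 기출문제］ 2번 ／ 석유 시추/［PCCP 기출문제］ 2번 ／ 석유 시추.py | solution
-- ===== SOURCE A (Python) =====
-- from collections import deque
--
-- def solution(land):
--     answer = 0 # 총 석유량
--     n, m = len(land), len(land[0])
--     dx, dy = [-1, 0, 1, 0], [0, -1, 0, 1]
--     coord_and_oil = dict()
--     for i in range(n):
--         for j in range(m):
--             # 석유가 있는 땅인 경우
--             if land[i][j] == 1:
--                 q = deque()
--                 q.append([i, j])
--                 land[i][j] = 0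
--                 oil = 1
--                 y_set = set()
--                 while q:
--                     x, y = q.popleft()
--                     y_set.add(y)
--                     for k in range(4):
--                         nx, ny = x + dx[k], y + dy[k]
--                         if 0 <= nx < n and 0 <= ny < m and land[nx][ny] == 1:
--                             q.append([nx, ny])
--                             land[nx][ny] = 0
--                             oil += 1
--
--                 for cy in y_set:
--                     if not coord_and_oil.get(cy):
--                         coord_and_oil[cy] = 0
--                     coord_and_oil[cy] += oil
--
--     return max(coord_and_oil.values())
-- ===== SOURCE B (Python) =====
-- def solution(land):
--     n, m = len(land), len(land[0])
--     # single row-major pass maintaining disjoint connected sets of oil cells: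
--     # when a new oil cell touches existing sets (above / left) they are merged.
--     comps = []
--     for i in range(n):
--         for j in range(m):
--             if land[i][j] == 1:
--                 land[i][j] = 0
--                 merged = {(i, j)}
--                 rest = []
--                 for comp in comps:
--                     if (i - 1, j) in comp or (i, j - 1) in comp:
--                         merged |= comp
--                     else:
--                         rest.append(comp)
--                 comps = rest + [merged]
--     totals = [0] * m
--     for comp in comps:
--         size = len(comp)
--         for col in {c for _, c in comp}:
--             totals[col] += size
--     return max(t for t in totals if t > 0)
-- ===== Notes on version B (the rewrite author's own statement) =====
-- stated objective: alternative
-- what changed: B drops the flood fill entirely: a single row-major pass maintains a list of disjoint connected oil-cell sets, merging the sets touched by each new cell's upper/left neighbours (union-by-merging connected-component labelling); a second phase tallies per-column totals from the component sets and returns the max of the positive entries, instead of A's per-seed BFS with a deque and an inline dict of column sums.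
import Mathlib
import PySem

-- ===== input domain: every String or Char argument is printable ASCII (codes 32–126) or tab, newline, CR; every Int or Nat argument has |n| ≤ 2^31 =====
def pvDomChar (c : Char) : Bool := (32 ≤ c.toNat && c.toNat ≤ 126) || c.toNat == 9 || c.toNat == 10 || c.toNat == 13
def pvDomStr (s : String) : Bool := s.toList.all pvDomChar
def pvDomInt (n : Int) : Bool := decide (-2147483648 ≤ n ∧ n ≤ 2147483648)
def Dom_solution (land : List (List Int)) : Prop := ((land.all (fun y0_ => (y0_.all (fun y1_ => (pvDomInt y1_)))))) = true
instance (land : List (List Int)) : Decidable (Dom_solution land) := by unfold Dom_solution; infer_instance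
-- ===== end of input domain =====

-- B replaces A's per-seed BFS flood fill + inline dict of column sums by a single row-major
-- pass that maintains a list of disjoint connected oil-cell sets, merging the sets touched by
-- each new cell's upper/left neighbours, then tallies per-column totals from the component
-- sets.  Both Pythons zero the oil cells of `land` in place (the same cells); the theorems
-- below are about the RETURN value.

-- ===== PORT A =====

-- land[i][j] read/write, totalised (all uses in the ports are inside Python's bounds guards)
def gget (g : List (List Int)) (c : Int × Int) : Int :=
  if 0 ≤ c.1 ∧ 0 ≤ c.2 then (g.getD c.1.toNat []).getD c.2.toNat 0 else 0

def gzero (g : List (List Int)) (c : Int × Int) : List (List Int) :=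
  if 0 ≤ c.1 ∧ 0 ≤ c.2 then g.set c.1.toNat ((g.getD c.1.toNat []).set c.2.toNat 0) else g

-- the guard `0 <= nx < n and 0 <= ny < m and land[nx][ny] == 1`
def pOK (n m : Int) (g : List (List Int)) (c : Int × Int) : Bool :=
  decide (0 ≤ c.1) && decide (c.1 < n) && decide (0 ≤ c.2) && decide (c.2 < m) && (gget g c == 1)

def dxsA : List Int := [-1, 0, 1, 0]
def dysA : List Int := [0, -1, 0, 1]

-- A's `for k in range(4)` neighbour loop: state (land, q, oil); pushes append at the back
def stepA (n m x y : Int) (st : List (List Int) × List (Int × Int) × Int) :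
    List (List Int) × List (Int × Int) × Int :=
  (PySem.List.pyRange 0 4 1).foldl (fun st k =>
    let nx := x + PySem.List.pyGetD dxsA k 0
    let ny := y + PySem.List.pyGetD dysA k 0
    if pOK n m st.1 (nx, ny) then
      (gzero st.1 (nx, ny), st.2.1 ++ [(nx, ny)], st.2.2 + 1)
    else st) st

-- number of cells equal to 1 (termination measure only)
def ones (g : List (List Int)) : Nat := (g.map (fun r => r.countP (fun v => v == 1))).sum

-- A's `while q` BFS loop: popleft, add the column, scan neighbours.  The Nat parameter is
-- plain fuel making the loop structurally recursive; `ones g + q.length` strictly decreases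
-- at every iteration (each push zeroes a 1-cell first), so the 0-fuel branch is never hit.
def bfsAF (n m : Int) : Nat → List (List Int) → List (Int × Int) → Int → PySem.Set Int →
    List (List Int) × Int × PySem.Set Int
  | _, g, [], oil, ys => (g, oil, ys)
  | 0, g, _ :: _, oil, ys => (g, oil, ys)
  | fuel + 1, g, (x, y) :: t, oil, ys =>
    bfsAF n m fuel (stepA n m x y (g, t, oil)).1 (stepA n m x y (g, t, oil)).2.1
      (stepA n m x y (g, t, oil)).2.2 (PySem.Set.add ys y)

def bfsA (n m : Int) (g : List (List Int)) (q : List (Int × Int)) (oil : Int)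
    (ys : PySem.Set Int) : List (List Int) × Int × PySem.Set Int :=
  bfsAF n m (ones g + q.length) g q oil ys

-- `if not coord_and_oil.get(cy): coord_and_oil[cy] = 0` then `coord_and_oil[cy] += oil`
def truthyOpt (o : Option Int) : Bool :=
  match o with
  | none => false
  | some v => v != 0

def dAgg (oil : Int) (d : PySem.Dict Int Int) (cy : Int) : PySem.Dict Int Int :=
  (if truthyOpt (d.get? cy) then d else d.insert cy 0).insert cy
    ((if truthyOpt (d.get? cy) then d else d.insert cy 0).getD cy 0 + oil)

-- one cell of the outer scan: flood-fill from (i, j) if it holds oil, fold its columns into the dict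
def cellA (n m i : Int) (s : List (List Int) × PySem.Dict Int Int) (j : Int) :
    List (List Int) × PySem.Dict Int Int :=
  if gget s.1 (i, j) == 1 then
    ((bfsA n m (gzero s.1 (i, j)) [(i, j)] 1 PySem.Set.empty).1,
      (bfsA n m (gzero s.1 (i, j)) [(i, j)] 1 PySem.Set.empty).2.2.foldl
        (dAgg (bfsA n m (gzero s.1 (i, j)) [(i, j)] 1 PySem.Set.empty).2.1) s.2)
  else s

def scanA (land : List (List Int)) : List (List Int) × PySem.Dict Int Int :=
  (PySem.List.pyRange 0 (land.length : Int) 1).foldl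
    (fun s i => (PySem.List.pyRange 0 ((land.headD []).length : Int) 1).foldl
      (cellA (land.length : Int) ((land.headD []).length : Int) i) s)
    (land, (PySem.Dict.empty : PySem.Dict Int Int))

def solution (land : List (List Int)) : Int :=
  (PySem.List.max? (scanA land).2.values (fun v => v)).getD 0

-- ===== PORT B =====

-- one step of B's `for comp in comps` merge loop: state (merged, rest)
def mergeStep (i j : Int) (s : PySem.Set (Int × Int) × List (List (Int × Int)))
    (comp : List (Int × Int)) : PySem.Set (Int × Int) × List (List (Int × Int)) :=
  if (i - 1, j) ∈ comp ∨ (i, j - 1) ∈ comp then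
    (comp.foldl PySem.Set.add s.1, s.2)
  else (s.1, s.2 ++ [comp])

-- one cell of B's row-major pass: absorb the oil cell, merging the touched component sets
def cellB (i : Int) (s : List (List Int) × List (List (Int × Int))) (j : Int) :
    List (List Int) × List (List (Int × Int)) :=
  if gget s.1 (i, j) == 1 then
    (gzero s.1 (i, j),
      (s.2.foldl (mergeStep i j) (PySem.Set.ofList [(i, j)], [])).2 ++
        [(s.2.foldl (mergeStep i j) (PySem.Set.ofList [(i, j)], [])).1])
  else s

def scanB (land : List (List Int)) : List (List Int) × List (List (Int × Int)) :=
  (PySem.List.pyRange 0 (land.length : Int) 1).foldl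
    (fun s i => (PySem.List.pyRange 0 ((land.headD []).length : Int) 1).foldl (cellB i) s)
    (land, ([] : List (List (Int × Int))))

-- `{c for _, c in comp}`
def colsOf (comp : List (Int × Int)) : PySem.Set Int :=
  comp.foldl (fun s c => PySem.Set.add s c.2) PySem.Set.empty

-- `totals[c] += oil`
def tAgg (oil : Int) (t : List Int) (c : Int) : List Int :=
  t.set c.toNat (t.getD c.toNat 0 + oil)

def totalsOf (md : Int) (comps : List (List (Int × Int))) : List Int :=
  comps.foldl (fun t comp => (colsOf comp).foldl (tAgg (comp.length : Int)) t)
    (List.replicate md.toNat (0 : Int))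

def solution_alt (land : List (List Int)) : Int :=
  (PySem.List.max? ((totalsOf ((land.headD []).length : Int) (scanB land).2).filter
    (fun v => decide (0 < v))) (fun v => v)).getD 0

-- ===== PRECONDITION & SPEC =====

-- Pre_ excludes exactly the inputs where the Python raises: the empty grid (IndexError on
-- land[0]), grids with a row shorter than the first row (the scan indexes land[i][j] for
-- every j < len(land[0]), IndexError), and grids whose first len(land[0]) columns contain
-- no cell equal to 1 (max() of an empty sequence, ValueError).
def Pre_solution (land : List (List Int)) : Prop :=
  land ≠ [] ∧ (∀ r ∈ land, (land.headD []).length ≤ r.length) ∧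
  (∃ r ∈ land, ∃ v ∈ r.take (land.headD []).length, v = 1)

instance (land : List (List Int)) : Decidable (Pre_solution land) := by
  unfold Pre_solution; infer_instance

def pvWitness_solution : List (List Int) := [[1]]

def Spec_solution (land : List (List Int)) (out : Int) : Prop := out = solution_alt land
instance (land : List (List Int)) (out : Int) : Decidable (Spec_solution land out) := by
  unfold Spec_solution; infer_instance

-- ===== CLAIM (what is proved, stated in full; the proofs are below) =====
def Claim_equal_solution : Prop :=
  ∀ (land : List (List Int)), Dom_solution land → Pre_solution land →
    Spec_solution land (solution land)

-- ===== LEMMAS AND PROOFS =====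


-- ---------- grid helper lemmas ----------

-- the four neighbours of (x, y): restates A's dx/dy loop and names B's up/left tests
def nbrs (x y : Int) : List (Int × Int) := [(x - 1, y), (x, y - 1), (x + 1, y), (x, y + 1)]

theorem ones_cons (r : List Int) (g : List (List Int)) :
    ones (r :: g) = r.countP (fun v => v == 1) + ones g := by
  simp [ones]

theorem countP_one_set_zero (r : List Int) (j : Nat) (hj : r.getD j 0 = 1) :
    (r.set j 0).countP (fun v => v == 1) + 1 = r.countP (fun v => v == 1) := by
  have hlen : j < r.length := by
    by_contra hco
    rw [Nat.not_lt] at hco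
    rw [List.getD_eq_default _ _ hco] at hj
    exact absurd hj (by norm_num)
  have hval : r[j] = 1 := by
    rwa [List.getD_eq_getElem?_getD, List.getElem?_eq_getElem hlen, Option.getD_some] at hj
  have hpos : 0 < r.countP (fun v => v == 1) := by
    rw [List.countP_pos_iff]
    exact ⟨r[j], List.getElem_mem hlen, by simp [hval]⟩
  rw [List.countP_set hlen]
  simp [hval]
  omega

theorem ones_set_zero : ∀ (g : List (List Int)) (i j : Nat),
    (g.getD i []).getD j 0 = 1 →
    ones (g.set i ((g.getD i []).set j 0)) + 1 = ones g
  | [], i, j, h => by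
    simp [List.getD] at h
  | r :: g', 0, j, h => by
    simp only [List.getD_cons_zero] at h
    simp only [List.getD_cons_zero, List.set_cons_zero, ones_cons]
    have := countP_one_set_zero r j h
    omega
  | r :: g', (k+1), j, h => by
    simp only [List.getD_cons_succ] at h
    simp only [List.getD_cons_succ, List.set_cons_succ, ones_cons]
    have := ones_set_zero g' k j h
    omega

theorem ones_gzero (g : List (List Int)) (c : Int × Int) (h : gget g c = 1) :
    ones (gzero g c) + 1 = ones g := by
  rcases c with ⟨a, b⟩
  by_cases hn : 0 ≤ a ∧ 0 ≤ b
  · unfold gget at h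
    rw [if_pos hn] at h
    unfold gzero
    rw [if_pos hn]
    exact ones_set_zero g a.toNat b.toNat h
  · unfold gget at h
    rw [if_neg hn] at h
    exact absurd h (by norm_num)

theorem pOK_gget {n m : Int} {g : List (List Int)} {c : Int × Int} (h : pOK n m g c = true) :
    gget g c = 1 := by
  unfold pOK at h
  simp only [Bool.and_eq_true, beq_iff_eq] at h
  exact h.2

theorem foldPushA_measure (n m : Int) :
    ∀ (cs : List (Int × Int)) (st : List (List Int) × List (Int × Int) × Int),
    ones (cs.foldl (fun st c =>
      if pOK n m st.1 c then (gzero st.1 c, st.2.1 ++ [c], st.2.2 + 1) else st) st).1 +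
    (cs.foldl (fun st c =>
      if pOK n m st.1 c then (gzero st.1 c, st.2.1 ++ [c], st.2.2 + 1) else st) st).2.1.length =
    ones st.1 + st.2.1.length
  | [], st => rfl
  | c :: cs, st => by
    simp only [List.foldl_cons]
    by_cases h : pOK n m st.1 c = true
    · rw [if_pos h]
      have h2 := foldPushA_measure n m cs (gzero st.1 c, st.2.1 ++ [c], st.2.2 + 1)
      have h3 := ones_gzero st.1 c (pOK_gget h)
      simp only [List.length_append, List.length_cons, List.length_nil] at h2 ⊢
      omega
    · rw [if_neg h]
      exact foldPushA_measure n m cs st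

theorem stepA_eq_foldNbrs (n m x y : Int) (st : List (List Int) × List (Int × Int) × Int) :
    stepA n m x y st = (nbrs x y).foldl (fun st c =>
      if pOK n m st.1 c then (gzero st.1 c, st.2.1 ++ [c], st.2.2 + 1) else st) st := by
  have hmap : nbrs x y = (PySem.List.pyRange 0 4 1).map
      (fun k => (x + PySem.List.pyGetD dxsA k 0, y + PySem.List.pyGetD dysA k 0)) := by
    have hr : PySem.List.pyRange 0 4 1 = [0, 1, 2, 3] := by decide
    have h0 : PySem.List.pyGetD dxsA 0 0 = -1 := by decide
    have h1 : PySem.List.pyGetD dxsA 1 0 = 0 := by decide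
    have h2 : PySem.List.pyGetD dxsA 2 0 = 1 := by decide
    have h3 : PySem.List.pyGetD dxsA 3 0 = 0 := by decide
    have g0 : PySem.List.pyGetD dysA 0 0 = 0 := by decide
    have g1 : PySem.List.pyGetD dysA 1 0 = -1 := by decide
    have g2 : PySem.List.pyGetD dysA 2 0 = 0 := by decide
    have g3 : PySem.List.pyGetD dysA 3 0 = 1 := by decide
    rw [hr]
    simp only [List.map_cons, List.map_nil, h0, h1, h2, h3, g0, g1, g2, g3, nbrs,
      add_zero, Int.add_neg_one]
  rw [hmap, List.foldl_map]
  rfl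

def pushList (n m : Int) (g : List (List Int)) (x y : Int) : List (Int × Int) :=
  (nbrs x y).filter (fun c => pOK n m g c)

def zeroAll (g : List (List Int)) (l : List (Int × Int)) : List (List Int) := l.foldl gzero g

theorem getD_set (l : List Int) (i i' : Nat) (v d : Int) :
    (l.set i v).getD i' d = if i' = i ∧ i < l.length then v else l.getD i' d := by
  rw [List.getD_eq_getElem?_getD, List.getD_eq_getElem?_getD, List.getElem?_set]
  split_ifs with h1 h2 h3 h3 <;> simp_all

theorem getDL_set (l : List (List Int)) (i i' : Nat) (v : List Int) :
    (l.set i v).getD i' [] = if i' = i ∧ i < l.length then v else l.getD i' [] := by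
  rw [List.getD_eq_getElem?_getD, List.getD_eq_getElem?_getD, List.getElem?_set]
  split_ifs with h1 h2 h3 h3 <;> simp_all

theorem getD_oob (l : List Int) (i : Nat) (h : l.length ≤ i) : l.getD i 0 = 0 :=
  List.getD_eq_default l 0 h

theorem gget_gzero (g : List (List Int)) (c c' : Int × Int) :
    gget (gzero g c) c' = if c' = c then 0 else gget g c' := by
  rcases c with ⟨a, b⟩
  rcases c' with ⟨a', b'⟩
  by_cases hn : 0 ≤ a ∧ 0 ≤ b
  · unfold gzero gget
    rw [if_pos hn]
    by_cases hn' : 0 ≤ a' ∧ 0 ≤ b'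
    · rw [if_pos hn', if_pos hn', getDL_set]
      by_cases hrow : a'.toNat = a.toNat ∧ a.toNat < g.length
      · rw [if_pos hrow, getD_set]
        have ha : a' = a := by omega
        by_cases hcol : b'.toNat = b.toNat ∧ b.toNat < (g.getD a.toNat []).length
        · rw [if_pos hcol]
          have hb : b' = b := by omega
          simp [ha, hb]
        · rw [if_neg hcol]
          by_cases hcc : (a', b') = ((a, b) : Int × Int)
          · rw [if_pos hcc]
            have hb : b' = b := by rw [Prod.mk.injEq] at hcc; exact hcc.2
            have : (g.getD a.toNat []).length ≤ b.toNat := by omega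
            rw [ha, hb, getD_oob _ _ this]
          · rw [if_neg hcc, hrow.1]
      · rw [if_neg hrow]
        by_cases hcc : (a', b') = ((a, b) : Int × Int)
        · rw [if_pos hcc]
          rw [Prod.mk.injEq] at hcc
          have ha : a' = a := hcc.1
          have hb : b' = b := hcc.2
          have : g.length ≤ a.toNat := by omega
          rw [ha, hb]
          rw [List.getD_eq_default _ _ this]
          simp
        · rw [if_neg hcc]
    · rw [if_neg hn', if_neg hn']
      have : ¬ ((a', b') = ((a, b) : Int × Int)) := by
        rw [Prod.mk.injEq]
        omega
      rw [if_neg this]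
  · unfold gzero gget
    rw [if_neg hn]
    by_cases hcc : (a', b') = ((a, b) : Int × Int)
    · rw [if_pos hcc]
      rw [Prod.mk.injEq] at hcc
      have hn' : ¬ (0 ≤ a' ∧ 0 ≤ b') := by omega
      rw [if_neg hn']
    · rw [if_neg hcc]

theorem zeroAll_nil (g : List (List Int)) : zeroAll g [] = g := rfl

theorem zeroAll_cons (g : List (List Int)) (c : Int × Int) (l : List (Int × Int)) :
    zeroAll g (c :: l) = zeroAll (gzero g c) l := rfl

theorem zeroAll_append (g : List (List Int)) (l1 l2 : List (Int × Int)) :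
    zeroAll g (l1 ++ l2) = zeroAll (zeroAll g l1) l2 := List.foldl_append ..

theorem gget_zeroAll (g : List (List Int)) (l : List (Int × Int)) (c : Int × Int) :
    gget (zeroAll g l) c = if c ∈ l then 0 else gget g c := by
  induction l generalizing g with
  | nil => simp [zeroAll_nil]
  | cons c0 l ih =>
    rw [zeroAll_cons, ih, gget_gzero]
    by_cases h1 : c ∈ l <;> by_cases h2 : c = c0 <;> simp [h1, h2]

theorem length_gzero (g : List (List Int)) (c : Int × Int) :
    (gzero g c).length = g.length := by
  unfold gzero
  split_ifs <;> simp

theorem rowlen_gzero (g : List (List Int)) (c : Int × Int) (i : Nat) :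
    ((gzero g c).getD i []).length = (g.getD i []).length := by
  unfold gzero
  split_ifs with h
  · rw [getDL_set]
    split_ifs with h2
    · rw [h2.1, List.length_set]
    · rfl
  · rfl

theorem length_zeroAll (g : List (List Int)) (l : List (Int × Int)) :
    (zeroAll g l).length = g.length := by
  induction l generalizing g with
  | nil => rfl
  | cons c l ih => rw [zeroAll_cons, ih, length_gzero]

theorem rowlen_zeroAll (g : List (List Int)) (l : List (Int × Int)) (i : Nat) :
    ((zeroAll g l).getD i []).length = (g.getD i []).length := by
  induction l generalizing g with
  | nil => rfl
  | cons c l ih => rw [zeroAll_cons, ih, rowlen_gzero]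

theorem gget_natCast (g : List (List Int)) (i j : Nat) :
    gget g ((i : Int), (j : Int)) = (g.getD i []).getD j 0 := by
  unfold gget
  rw [if_pos (by constructor <;> positivity)]
  simp

theorem grid_ext (g1 g2 : List (List Int)) (hlen : g1.length = g2.length)
    (hrow : ∀ i : Nat, (g1.getD i []).length = (g2.getD i []).length)
    (h : ∀ c, gget g1 c = gget g2 c) : g1 = g2 := by
  apply List.ext_getElem hlen
  intro i hi1 hi2
  apply List.ext_getElem
  · have := hrow i
    rwa [List.getD_eq_getElem?_getD, List.getD_eq_getElem?_getD,
      List.getElem?_eq_getElem hi1, List.getElem?_eq_getElem hi2] at this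
  · intro j hj1 hj2
    have hg := h ((i : Int), (j : Int))
    rw [gget_natCast, gget_natCast] at hg
    rw [List.getD_eq_getElem?_getD (l := g1), List.getD_eq_getElem?_getD (l := g2),
      List.getElem?_eq_getElem hi1, List.getElem?_eq_getElem hi2] at hg
    simp only [Option.getD_some] at hg
    rw [List.getD_eq_getElem?_getD, List.getD_eq_getElem?_getD,
      List.getElem?_eq_getElem hj1, List.getElem?_eq_getElem hj2] at hg
    simpa using hg

theorem zeroAll_congr (g : List (List Int)) (l1 l2 : List (Int × Int))
    (h : ∀ c, c ∈ l1 ↔ c ∈ l2) : zeroAll g l1 = zeroAll g l2 := by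
  apply grid_ext
  · rw [length_zeroAll, length_zeroAll]
  · intro i
    rw [rowlen_zeroAll, rowlen_zeroAll]
  · intro c
    rw [gget_zeroAll, gget_zeroAll]
    by_cases hc : c ∈ l1
    · rw [if_pos hc, if_pos ((h c).1 hc)]
    · rw [if_neg hc, if_neg (fun hx => hc ((h c).2 hx))]

theorem pOK_gzero (n m : Int) (g : List (List Int)) (c x : Int × Int) (h : x ≠ c) :
    pOK n m (gzero g c) x = pOK n m g x := by
  unfold pOK
  rw [gget_gzero, if_neg h]

theorem pOK_zeroAll (n m : Int) (g : List (List Int)) (L : List (Int × Int)) (c : Int × Int) :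
    pOK n m (zeroAll g L) c = (pOK n m g c && decide (c ∉ L)) := by
  unfold pOK
  rw [gget_zeroAll]
  by_cases h : c ∈ L
  · simp [h]
  · simp [h]

theorem nbrs_nodup (x y : Int) : (nbrs x y).Nodup := by
  simp [nbrs, Prod.ext_iff]
  omega

theorem pushList_nodup (n m : Int) (g : List (List Int)) (x y : Int) :
    (pushList n m g x y).Nodup := (nbrs_nodup x y).filter _

theorem mem_pushList {n m : Int} {g : List (List Int)} {x y : Int} {c : Int × Int}
    (h : c ∈ pushList n m g x y) : pOK n m g c = true :=
  (List.mem_filter.1 h).2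

theorem mem_pushList_iff {n m : Int} {g : List (List Int)} {x y : Int} {c : Int × Int} :
    c ∈ pushList n m g x y ↔ c ∈ nbrs x y ∧ pOK n m g c = true := by
  unfold pushList
  rw [List.mem_filter]

theorem pOK_bounds {n m : Int} {g : List (List Int)} {c : Int × Int}
    (h : pOK n m g c = true) : 0 ≤ c.1 ∧ c.1 < n ∧ 0 ≤ c.2 ∧ c.2 < m := by
  unfold pOK at h
  simp only [Bool.and_eq_true, decide_eq_true_eq] at h
  exact ⟨h.1.1.1.1, h.1.1.1.2, h.1.1.2, h.1.2⟩

theorem pushList_zeroAll (n m : Int) (g : List (List Int)) (L : List (Int × Int)) (x y : Int) :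
    pushList n m (zeroAll g L) x y =
      (pushList n m g x y).filter (fun c => decide (c ∉ L)) := by
  unfold pushList
  rw [List.filter_filter]
  apply List.filter_congr
  intro c _
  rw [pOK_zeroAll]
  rw [Bool.and_comm]

theorem ones_zeroAll (g : List (List Int)) (l : List (Int × Int)) (hnd : l.Nodup)
    (h1 : ∀ c ∈ l, gget g c = 1) : ones (zeroAll g l) + l.length = ones g := by
  induction l generalizing g with
  | nil => rfl
  | cons c l ih =>
    rw [zeroAll_cons]
    have hz := ones_gzero g c (h1 c List.mem_cons_self)
    have hih := ih (gzero g c) hnd.of_cons (by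
      intro x hx
      rw [gget_gzero, if_neg (by rintro rfl; exact (List.nodup_cons.1 hnd).1 hx)]
      exact h1 x (List.mem_cons_of_mem _ hx))
    simp only [List.length_cons]
    omega

theorem foldPushA_char (n m : Int) :
    ∀ (cs : List (Int × Int)), cs.Nodup → ∀ (g : List (List Int)) (acc : List (Int × Int))
    (oil : Int),
    cs.foldl (fun st c =>
      if pOK n m st.1 c then (gzero st.1 c, st.2.1 ++ [c], st.2.2 + 1) else st) (g, acc, oil) =
    (zeroAll g (cs.filter (fun c => pOK n m g c)),
      acc ++ cs.filter (fun c => pOK n m g c),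
      oil + (cs.filter (fun c => pOK n m g c)).length)
  | [], _, g, acc, oil => by simp [zeroAll_nil]
  | c :: cs, hnd, g, acc, oil => by
    have hcn : c ∉ cs := (List.nodup_cons.1 hnd).1
    simp only [List.foldl_cons, List.filter_cons]
    by_cases h : pOK n m g c = true
    · rw [if_pos h]
      simp only [h, if_true]
      have hrec := foldPushA_char n m cs hnd.of_cons (gzero g c) (acc ++ [c]) (oil + 1)
      rw [hrec]
      have hf : cs.filter (fun x => pOK n m (gzero g c) x) = cs.filter (fun x => pOK n m g x) := by
        apply List.filter_congr
        intro x hx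
        exact pOK_gzero n m g c x (by rintro rfl; exact hcn hx)
      rw [hf]
      simp only [Prod.mk.injEq]
      refine ⟨rfl, by simp, ?_⟩
      simp only [List.length_cons]
      push_cast
      ring
    · rw [if_neg h]
      simp only [h]
      exact foldPushA_char n m cs hnd.of_cons g acc oil

theorem stepA_char (n m x y : Int) (g : List (List Int)) (acc : List (Int × Int)) (oil : Int) :
    stepA n m x y (g, acc, oil) =
      (zeroAll g (pushList n m g x y), acc ++ pushList n m g x y,
        oil + (pushList n m g x y).length) := by
  rw [stepA_eq_foldNbrs]
  exact foldPushA_char n m (nbrs x y) (nbrs_nodup x y) g acc oil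

theorem bfsA_nil (n m : Int) (g : List (List Int)) (oil : Int) (ys : PySem.Set Int) :
    bfsA n m g [] oil ys = (g, oil, ys) := by
  rw [bfsA, bfsAF]

theorem bfsA_cons (n m : Int) (g : List (List Int)) (x y : Int) (t : List (Int × Int))
    (oil : Int) (ys : PySem.Set Int) :
    bfsA n m g ((x, y) :: t) oil ys =
      bfsA n m (zeroAll g (pushList n m g x y)) (t ++ pushList n m g x y)
        (oil + (pushList n m g x y).length) (PySem.Set.add ys y) := by
  unfold bfsA
  have hL : ones g + ((x, y) :: t).length = (ones g + t.length) + 1 := by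
    simp only [List.length_cons]
    omega
  rw [hL, bfsAF, stepA_char]
  have hfuel : ones g + t.length =
      ones (zeroAll g (pushList n m g x y)) + (t ++ pushList n m g x y).length := by
    have h1 := ones_zeroAll g (pushList n m g x y) (pushList_nodup n m g x y)
      (fun c hc => pOK_gget (mem_pushList hc))
    simp only [List.length_append]
    omega
  rw [hfuel]

theorem measure_step (n m : Int) (g : List (List Int)) (x y : Int) :
    ones (zeroAll g (pushList n m g x y)) + (pushList n m g x y).length = ones g :=
  ones_zeroAll g _ (pushList_nodup n m g x y)
    (fun c hc => pOK_gget (mem_pushList hc))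


-- ---------- connectivity on oil cells ----------

def StepP (O : Int × Int → Prop) (a b : Int × Int) : Prop :=
  O a ∧ O b ∧ b ∈ nbrs a.1 a.2

def ConnP (O : Int × Int → Prop) : Int × Int → Int × Int → Prop :=
  Relation.ReflTransGen (StepP O)

def OilOf (n m : Int) (g : List (List Int)) (c : Int × Int) : Prop := pOK n m g c = true

theorem mem_nbrs_iff (a b : Int × Int) :
    b ∈ nbrs a.1 a.2 ↔
      b = (a.1 - 1, a.2) ∨ b = (a.1, a.2 - 1) ∨ b = (a.1 + 1, a.2) ∨ b = (a.1, a.2 + 1) := by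
  simp [nbrs]

theorem nbrs_symm {a b : Int × Int} (h : b ∈ nbrs a.1 a.2) : a ∈ nbrs b.1 b.2 := by
  rcases a with ⟨ax, ay⟩
  rcases b with ⟨bx, by_⟩
  simp only [nbrs, List.mem_cons, List.not_mem_nil, or_false, Prod.mk.injEq] at h ⊢
  omega

theorem stepP_symm (O : Int × Int → Prop) : Symmetric (StepP O) := by
  intro a b h
  exact ⟨h.2.1, h.1, nbrs_symm h.2.2⟩

theorem connP_symm {O : Int × Int → Prop} {a b : Int × Int} (h : ConnP O a b) : ConnP O b a :=
  Relation.ReflTransGen.symmetric (stepP_symm O) h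

theorem connP_trans {O : Int × Int → Prop} {a b c : Int × Int}
    (h1 : ConnP O a b) (h2 : ConnP O b c) : ConnP O a c :=
  Relation.ReflTransGen.trans h1 h2

theorem connP_cases {O : Int × Int → Prop} {a b : Int × Int} (h : ConnP O a b) :
    a = b ∨ (O a ∧ O b) := by
  induction h with
  | refl => exact Or.inl rfl
  | tail h1 hstep ih =>
    rcases ih with rfl | ⟨ha, _⟩
    · exact Or.inr ⟨hstep.1, hstep.2.1⟩
    · exact Or.inr ⟨ha, hstep.2.1⟩

theorem connP_mono {O O' : Int × Int → Prop} (hsub : ∀ c, O c → O' c) {a b : Int × Int}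
    (h : ConnP O a b) : ConnP O' a b := by
  induction h with
  | refl => exact Relation.ReflTransGen.refl
  | tail h1 hstep ih =>
    exact Relation.ReflTransGen.tail ih ⟨hsub _ hstep.1, hsub _ hstep.2.1, hstep.2.2⟩

theorem connP_congr {O O' : Int × Int → Prop} (hiff : ∀ c, O c ↔ O' c) (a b : Int × Int) :
    ConnP O a b ↔ ConnP O' a b :=
  ⟨connP_mono (fun c => (hiff c).1), connP_mono (fun c => (hiff c).2)⟩

-- membership closed under oil-connectivity characterises a connected component
def IsClass (O : Int × Int → Prop) (C : List (Int × Int)) : Prop :=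
  C ≠ [] ∧ C.Nodup ∧ ∀ c ∈ C, ∀ d, (d ∈ C ↔ O d ∧ ConnP O c d)

theorem class_oil {O : Int × Int → Prop} {C : List (Int × Int)} (h : IsClass O C)
    {c : Int × Int} (hc : c ∈ C) : O c :=
  (((h.2.2 c hc c).1 hc)).1

theorem isClass_of_char {O : Int × Int → Prop} {C : List (Int × Int)} {z : Int × Int}
    (hz : z ∈ C) (hnd : C.Nodup) (hchar : ∀ d, d ∈ C ↔ O d ∧ ConnP O z d) : IsClass O C := by
  refine ⟨by rintro rfl; exact absurd hz List.not_mem_nil, hnd, ?_⟩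
  intro c hc d
  have hzc := (hchar c).1 hc
  rw [hchar d]
  constructor
  · rintro ⟨hOd, hzd⟩
    exact ⟨hOd, connP_trans (connP_symm hzc.2) hzd⟩
  · rintro ⟨hOd, hcd⟩
    exact ⟨hOd, connP_trans hzc.2 hcd⟩

theorem isClass_congr {O O' : Int × Int → Prop} (hiff : ∀ c, O c ↔ O' c)
    {C : List (Int × Int)} (h : IsClass O C) : IsClass O' C := by
  refine ⟨h.1, h.2.1, ?_⟩
  intro c hc d
  rw [(h.2.2 c hc d), hiff d, connP_congr hiff]

def Disj (C D : List (Int × Int)) : Prop := ∀ c, c ∈ C → c ∉ D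

theorem disj_symm {C D : List (Int × Int)} (h : Disj C D) : Disj D C :=
  fun c hcD hcC => h c hcC hcD

-- per-component contribution to the column-col total
def fcol (col : Int) (C : List (Int × Int)) : Int :=
  (C.length : Int) * (if ∃ c ∈ C, c.2 = col then 1 else 0)

theorem fcol_perm (col : Int) {C C' : List (Int × Int)} (h : C.Perm C') :
    fcol col C = fcol col C' := by
  unfold fcol
  rw [h.length_eq]
  congr 1
  by_cases he : ∃ c ∈ C, c.2 = col
  · rw [if_pos he, if_pos (by
      obtain ⟨c, hc, hcol⟩ := he
      exact ⟨c, h.mem_iff.1 hc, hcol⟩)]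
  · rw [if_neg he, if_neg (by
      rintro ⟨c, hc, hcol⟩
      exact he ⟨c, h.mem_iff.2 hc, hcol⟩)]

-- two duplicate-free families of connectivity classes with the same coverage have equal sums
theorem famSum (O : Int × Int → Prop) (f : List (Int × Int) → Int)
    (hf : ∀ C C', C.Perm C' → f C = f C') :
    ∀ (L1 L2 : List (List (Int × Int))),
    (∀ C ∈ L1, IsClass O C) → (∀ C ∈ L2, IsClass O C) →
    L1.Pairwise Disj → L2.Pairwise Disj →
    (∀ c, (∃ C ∈ L1, c ∈ C) ↔ (∃ C ∈ L2, c ∈ C)) →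
    (L1.map f).sum = (L2.map f).sum
  | [], L2, _, hcl2, _, _, hcov => by
    match L2 with
    | [] => rfl
    | C' :: t2 =>
      obtain ⟨c, hc⟩ := List.exists_mem_of_ne_nil C' (hcl2 C' List.mem_cons_self).1
      have := (hcov c).2 ⟨C', List.mem_cons_self, hc⟩
      simp at this
  | C :: t, L2, hcl1, hcl2, hpw1, hpw2, hcov => by
    obtain ⟨c0, hc0⟩ := List.exists_mem_of_ne_nil C (hcl1 C List.mem_cons_self).1
    obtain ⟨C', hC'mem, hc0'⟩ := (hcov c0).1 ⟨C, List.mem_cons_self, hc0⟩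
    obtain ⟨u, v, rfl⟩ := List.append_of_mem hC'mem
    have hclC := hcl1 C List.mem_cons_self
    have hclC' := hcl2 C' hC'mem
    have hsetEq : ∀ d, d ∈ C ↔ d ∈ C' := by
      intro d
      rw [hclC.2.2 c0 hc0 d, hclC'.2.2 c0 hc0' d]
    have hperm : C.Perm C' :=
      (List.perm_ext_iff_of_nodup hclC.2.1 hclC'.2.1).2 hsetEq
    have hdisjC : ∀ D ∈ t, Disj C D := (List.pairwise_cons.1 hpw1).1
    have hpwuv := List.pairwise_append.1 hpw2
    have hdisjC' : ∀ D, D ∈ u ++ v → Disj C' D := by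
      intro D hD
      rcases List.mem_append.1 hD with hDu | hDv
      · exact disj_symm (hpwuv.2.2 D hDu C' List.mem_cons_self)
      · exact (List.pairwise_cons.1 hpwuv.2.1).1 D hDv
    have hcov' : ∀ e, (∃ D ∈ t, e ∈ D) ↔ (∃ D ∈ u ++ v, e ∈ D) := by
      intro e
      constructor
      · rintro ⟨D, hD, heD⟩
        have heC : e ∉ C := fun heC => hdisjC D hD e heC heD
        obtain ⟨D', hD', heD'⟩ := (hcov e).1 ⟨D, List.mem_cons_of_mem C hD, heD⟩
        rcases List.mem_append.1 hD' with h | h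
        · exact ⟨D', List.mem_append.2 (Or.inl h), heD'⟩
        · rcases List.mem_cons.1 h with rfl | h
          · exact absurd ((hsetEq e).2 heD') heC
          · exact ⟨D', List.mem_append.2 (Or.inr h), heD'⟩
      · rintro ⟨D, hD, heD⟩
        have heC' : e ∉ C' := fun heC' => hdisjC' D hD e heC' heD
        obtain ⟨D', hD', heD'⟩ := (hcov e).2
          ⟨D, by
            rcases List.mem_append.1 hD with h | h
            · exact List.mem_append.2 (Or.inl h)
            · exact List.mem_append.2 (Or.inr (List.mem_cons_of_mem C' h)), heD⟩
        rcases List.mem_cons.1 hD' with rfl | h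
        · exact absurd ((hsetEq e).1 heD') heC'
        · exact ⟨D', h, heD'⟩
    have hsub : (u ++ v).Sublist (u ++ C' :: v) :=
      List.Sublist.append_left (List.sublist_cons_self C' v) u
    have ih := famSum O f hf t (u ++ v) (fun D hD => hcl1 D (List.mem_cons_of_mem C hD))
      (fun D hD => hcl2 D (hsub.mem hD))
      (List.pairwise_cons.1 hpw1).2 (hpw2.sublist hsub) hcov'
    simp only [List.map_cons, List.map_append, List.sum_cons, List.sum_append] at ih ⊢
    have hfC : f C = f C' := hf C C' hperm
    omega

-- ---------- dict / totals bookkeeping (shared with the previous development) ----------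

def DOK (d : PySem.Dict Int Int) : Prop :=
  ∀ k : Int, (k ∈ d.keys ↔ d.getD k 0 ≠ 0) ∧ 0 ≤ d.getD k 0

theorem dAgg_char (oil : Int) (d : PySem.Dict Int Int) (cy : Int) (hd : DOK d) :
    (∀ k, (dAgg oil d cy).getD k 0 = d.getD k 0 + if k = cy then oil else 0) ∧
    (∀ k, k ∈ (dAgg oil d cy).keys ↔ k = cy ∨ k ∈ d.keys) ∧
    (d.keys.Nodup → (dAgg oil d cy).keys.Nodup) := by
  unfold dAgg
  by_cases htr : truthyOpt (d.get? cy) = true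
  · rw [if_pos htr]
    refine ⟨?_, ?_, ?_⟩
    · intro k
      rw [PySem.Dict.getD_insert]
      split_ifs with h
      · rw [h]
      · omega
    · intro k
      rw [PySem.Dict.mem_keys_insert]
    · intro h
      exact PySem.Dict.nodup_keys_insert _ _ _ h
  · rw [if_neg htr]
    have hnone : d.get? cy = none := by
      cases hc : d.get? cy with
      | none => rfl
      | some v =>
        rw [hc] at htr
        unfold truthyOpt at htr
        simp only [bne_iff_ne, ne_eq, Bool.not_eq_true, decide_eq_false_iff_not,
          Decidable.not_not] at htr
        have hv0 : v = 0 := by simpa using htr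
        have hmem : cy ∈ d.keys := by
          by_contra hno
          rw [← PySem.Dict.get?_eq_none_iff_not_mem_keys] at hno
          rw [hc] at hno
          simp at hno
        have hne := (hd cy).1.1 hmem
        have hgd : d.getD cy 0 = v := by rw [PySem.Dict.getD_eq_get?_getD, hc]; rfl
        rw [hgd] at hne
        exact absurd hv0 hne
    have hd0 : d.getD cy 0 = 0 := by rw [PySem.Dict.getD_eq_get?_getD, hnone]; rfl
    rw [PySem.Dict.getD_insert_self, PySem.Dict.insert_insert_self]
    refine ⟨?_, ?_, ?_⟩
    · intro k
      rw [PySem.Dict.getD_insert]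
      split_ifs with h
      · rw [h, hd0]
      · omega
    · intro k
      rw [PySem.Dict.mem_keys_insert]
    · intro h
      exact PySem.Dict.nodup_keys_insert _ _ _ h

theorem dAgg_DOK (oil : Int) (d : PySem.Dict Int Int) (cy : Int) (hd : DOK d)
    (hoil : 1 ≤ oil) : DOK (dAgg oil d cy) := by
  have hc := dAgg_char oil d cy hd
  intro k
  rw [hc.1 k, hc.2.1 k]
  have h1 := (hd k).1
  have h2 := (hd k).2
  by_cases he : k = cy
  · subst he
    constructor
    · constructor
      · intro _; omega
      · intro _; left; rfl
    · omega
  · simp only [he, if_false, add_zero]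
    refine ⟨?_, h2⟩
    rw [false_or]
    exact h1

theorem dfold_char (oil : Int) (hoil : 1 ≤ oil) : ∀ (ys : List Int) (d : PySem.Dict Int Int),
    DOK d →
    DOK (ys.foldl (dAgg oil) d) ∧
    (∀ k, (ys.foldl (dAgg oil) d).getD k 0 = d.getD k 0 + oil * ys.count k) ∧
    (∀ k, k ∈ (ys.foldl (dAgg oil) d).keys ↔ k ∈ d.keys ∨ k ∈ ys) ∧
    (d.keys.Nodup → (ys.foldl (dAgg oil) d).keys.Nodup)
  | [], d, hd => by
    refine ⟨hd, ?_, ?_, fun h => h⟩ <;> simp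
  | cy :: ys, d, hd => by
    have hc := dAgg_char oil d cy hd
    have hdok := dAgg_DOK oil d cy hd hoil
    have ih := dfold_char oil hoil ys (dAgg oil d cy) hdok
    simp only [List.foldl_cons]
    refine ⟨ih.1, ?_, ?_, fun h => ih.2.2.2 (hc.2.2 h)⟩
    · intro k
      rw [ih.2.1 k, hc.1 k, List.count_cons]
      by_cases he : cy = k
      · subst he
        simp only [if_pos rfl, BEq.rfl, if_true]
        push_cast
        ring
      · rw [if_neg (fun hh => he hh.symm)]
        have : (cy == k) = false := by simpa using he
        rw [this]
        push_cast
        ring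
    · intro k
      rw [ih.2.2.1 k, hc.2.1 k, List.mem_cons]
      tauto

theorem tfold_char (oil : Int) : ∀ (ys : List Int) (t : List Int),
    (∀ c ∈ ys, 0 ≤ c ∧ c < (t.length : Int)) →
    ((ys.foldl (tAgg oil) t).length = t.length) ∧
    (∀ jn : Nat, (ys.foldl (tAgg oil) t).getD jn 0 = t.getD jn 0 + oil * ys.count (jn : Int))
  | [], t, h => by
    refine ⟨rfl, ?_⟩ <;> simp
  | c :: ys, t, h => by
    have hb := h c List.mem_cons_self
    have hlen : (tAgg oil t c).length = t.length := List.length_set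
    have ih := tfold_char oil ys (tAgg oil t c) (fun x hx => by
      rw [hlen]
      exact h x (List.mem_cons_of_mem _ hx))
    simp only [List.foldl_cons]
    refine ⟨by rw [ih.1, hlen], ?_⟩
    intro jn
    rw [ih.2 jn]
    unfold tAgg
    rw [getD_set, List.count_cons]
    by_cases hj : jn = c.toNat
    · have hlt : c.toNat < t.length := by omega
      rw [if_pos ⟨hj, hlt⟩]
      have : (c == (jn : Int)) = true := by
        simp only [beq_iff_eq]
        omega
      rw [this, hj]
      simp only [if_true]
      push_cast
      ring
    · have hne : (c == (jn : Int)) = false := by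
        simp only [beq_eq_false_iff_ne, ne_eq]
        omega
      rw [if_neg (fun hh => hj hh.1), hne]
      push_cast
      ring

theorem max?_congr (l1 l2 : List Int) (h : ∀ v, v ∈ l1 ↔ v ∈ l2) :
    PySem.List.max? l1 (fun v => v) = PySem.List.max? l2 (fun v => v) := by
  cases h1 : PySem.List.max? l1 (fun v => v) with
  | none =>
    rw [PySem.List.max?_eq_none_iff] at h1
    subst h1
    have h2 : l2 = [] := by
      rw [List.eq_nil_iff_forall_not_mem]
      intro v hv
      exact (List.not_mem_nil) ((h v).2 hv)
    rw [h2]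
    exact ((PySem.List.max?_eq_none_iff _ _).mpr rfl).symm
  | some a =>
    have ha2 : a ∈ l2 := (h a).1 (PySem.List.max?_mem h1)
    cases h2 : PySem.List.max? l2 (fun v => v) with
    | none =>
      rw [PySem.List.max?_eq_none_iff] at h2
      subst h2
      exact absurd ha2 List.not_mem_nil
    | some b =>
      have hb1 : b ∈ l1 := (h b).2 (PySem.List.max?_mem h2)
      have hab : a ≤ b := PySem.List.max?_isMax h2 a ha2
      have hba : b ≤ a := PySem.List.max?_isMax h1 b hb1
      exact congrArg some (le_antisymm hab hba)

def DTRel (md : Int) (d : PySem.Dict Int Int) (t : List Int) : Prop :=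
  t.length = md.toNat ∧ DOK d ∧ d.keys.Nodup ∧
  (∀ k ∈ d.keys, 0 ≤ k ∧ k < md) ∧
  (∀ jn : Nat, jn < md.toNat → d.getD (jn : Int) 0 = t.getD jn 0)

theorem final_eq (md : Int) (d : PySem.Dict Int Int) (t : List Int) (h : DTRel md d t) :
    (PySem.List.max? d.values (fun v => v)).getD 0 =
    (PySem.List.max? (t.filter (fun v => decide (0 < v))) (fun v => v)).getD 0 := by
  obtain ⟨hlen, hdok, hnd, hkb, hval⟩ := h
  rw [max?_congr d.values (t.filter (fun v => decide (0 < v)))]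
  intro v
  rw [PySem.Dict.values_eq_map_keys d hnd 0]
  constructor
  · intro hv
    obtain ⟨k, hk, hkv⟩ := List.mem_map.1 hv
    have hb := hkb k hk
    have hne := (hdok k).1.1 hk
    have hge := (hdok k).2
    have hjk : ((k.toNat : Nat) : Int) = k := by omega
    have hlt : k.toNat < md.toNat := by omega
    have hvt : t.getD k.toNat 0 = v := by
      rw [← hval k.toNat (by omega), hjk]
      exact hkv
    have hlt2 : k.toNat < t.length := by omega
    rw [List.mem_filter]
    constructor
    · have hve : t[k.toNat] = v := by
        rw [List.getD_eq_getElem?_getD, List.getElem?_eq_getElem hlt2] at hvt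
        simpa using hvt
      exact hve ▸ List.getElem_mem hlt2
    · simp only [decide_eq_true_eq]
      omega
  · intro hv
    rw [List.mem_filter] at hv
    obtain ⟨jn, hjn, hje⟩ := List.mem_iff_getElem.1 hv.1
    have hpos : 0 < v := by simpa using hv.2
    have hgd : t.getD jn 0 = v := by
      rw [List.getD_eq_getElem?_getD, List.getElem?_eq_getElem hjn]
      simpa using hje
    have hdv : d.getD (jn : Int) 0 = v := by
      rw [hval jn (by omega)]
      exact hgd
    have hk : (jn : Int) ∈ d.keys := (hdok _).1.2 (by omega)
    exact List.mem_map.2 ⟨(jn : Int), hk, hdv⟩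

theorem getD_replicate_zero (k jn : Nat) : (List.replicate k (0 : Int)).getD jn 0 = 0 := by
  rw [List.getD_eq_getElem?_getD]
  rcases lt_or_ge jn k with h | h
  · rw [List.getElem?_eq_getElem (by simpa using h)]
    simp
  · rw [List.getElem?_eq_none (by simpa using h)]
    rfl


-- ---------- A side: the BFS flood fill collects exactly one connectivity class ----------

theorem comp_closed {O : Int × Int → Prop} {V : List (Int × Int)} {s : Int × Int} (hs : s ∈ V)
    (hcl : ∀ c ∈ V, ∀ d, O d → d ∈ nbrs c.1 c.2 → d ∈ V) :
    ∀ d, ConnP O s d → d ∈ V := by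
  intro d h
  induction h with
  | refl => exact hs
  | tail h1 hstep ih => exact hcl _ ih _ hstep.2.1 hstep.2.2

theorem bfs_char (n m : Int) (g0 : List (List Int)) (W : List (Int × Int))
    (hW : ∀ c ∈ W, ∀ d, OilOf n m g0 d → d ∈ nbrs c.1 c.2 → d ∈ W) (s : Int × Int) :
    ∀ (N : Nat) (Pp q : List (Int × Int)) (ys : PySem.Set Int),
    ones (zeroAll g0 (W ++ Pp ++ q)) + q.length = N →
    (∀ c ∈ Pp ++ q, OilOf n m g0 c ∧ ConnP (OilOf n m g0) s c ∧ c ∉ W) →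
    (Pp ++ q).Nodup →
    (∀ c ∈ Pp, ∀ d, OilOf n m g0 d → d ∈ nbrs c.1 c.2 → d ∈ Pp ++ q) →
    (∀ col, col ∈ ys ↔ ∃ c ∈ Pp, c.2 = col) → ys.Nodup →
    ∃ (V : List (Int × Int)) (ys' : PySem.Set Int),
      bfsA n m (zeroAll g0 (W ++ Pp ++ q)) q (((Pp ++ q).length : Int)) ys =
        (zeroAll g0 (W ++ V), ((V.length : Int)), ys') ∧
      (∀ c ∈ Pp ++ q, c ∈ V) ∧ V.Nodup ∧
      (∀ c ∈ V, OilOf n m g0 c ∧ ConnP (OilOf n m g0) s c ∧ c ∉ W) ∧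
      (∀ c ∈ V, ∀ d, OilOf n m g0 d → d ∈ nbrs c.1 c.2 → d ∈ V) ∧
      (∀ col, col ∈ ys' ↔ ∃ c ∈ V, c.2 = col) ∧ ys'.Nodup := by
  intro N
  induction N using Nat.strong_induction_on with
  | _ N IH =>
  intro Pp q ys hN hmem hnd hclo hys hysnd
  rcases q with _ | ⟨⟨x, y⟩, t⟩
  · rw [bfsA_nil]
    refine ⟨Pp, ys, ?_, fun c hc => by simpa using hc, by simpa using hnd,
      fun c hc => hmem c (by simpa using hc), fun c hc => by
        have := hclo c hc
        simpa using this, hys, hysnd⟩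
    simp
  · set g := zeroAll g0 (W ++ Pp ++ ((x, y) :: t)) with hgdef
    set P := pushList n m g x y with hPdef
    have hPmem : ∀ d, d ∈ P ↔ (d ∈ nbrs x y ∧ OilOf n m g0 d) ∧
        d ∉ W ++ Pp ++ ((x, y) :: t) := by
      intro d
      rw [hPdef, hgdef, pushList_zeroAll, List.mem_filter, mem_pushList_iff]
      simp [OilOf]
    have hxy_mem : ((x, y) : Int × Int) ∈ Pp ++ ((x, y) :: t) := by simp
    obtain ⟨hOxy, hCxy, hWxy⟩ := hmem _ hxy_mem
    rw [bfsA_cons]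
    -- the recursive call's parameters
    have hlisteq : (W ++ Pp ++ ((x, y) :: t)) ++ P = W ++ (Pp ++ [(x, y)]) ++ (t ++ P) := by
      simp [List.append_assoc]
    have hgrid : zeroAll g P = zeroAll g0 (W ++ (Pp ++ [(x, y)]) ++ (t ++ P)) := by
      rw [hgdef, ← zeroAll_append, hlisteq]
    have hmemeq : ∀ c : Int × Int,
        c ∈ (Pp ++ [(x, y)]) ++ (t ++ P) ↔ c ∈ (Pp ++ ((x, y) :: t)) ∨ c ∈ P := by
      intro c
      simp [List.mem_append, List.mem_cons]
      tauto
    have hoil : ((Pp ++ ((x, y) :: t)).length : Int) + (P.length : Int) =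
        (((Pp ++ [(x, y)]) ++ (t ++ P)).length : Int) := by
      simp only [List.length_append, List.length_cons, List.length_nil]
      push_cast
      omega
    have hmem' : ∀ c ∈ (Pp ++ [(x, y)]) ++ (t ++ P),
        OilOf n m g0 c ∧ ConnP (OilOf n m g0) s c ∧ c ∉ W := by
      intro c hc
      rcases (hmemeq c).1 hc with h | h
      · exact hmem c h
      · have hp := (hPmem c).1 h
        refine ⟨hp.1.2, ?_, fun hcW => hp.2 (by simp [hcW])⟩
        exact Relation.ReflTransGen.tail hCxy ⟨hOxy, hp.1.2, hp.1.1⟩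
    have hndP : P.Nodup := by
      rw [hPdef]
      exact pushList_nodup n m g x y
    have hnd' : ((Pp ++ [(x, y)]) ++ (t ++ P)).Nodup := by
      have h1 : ((Pp ++ ((x, y) :: t)) ++ P).Nodup := by
        refine hnd.append hndP ?_
        intro a ha haP
        exact ((hPmem a).1 haP).2 (by simp only [List.mem_append] at ha ⊢; tauto)
      have : (Pp ++ ((x, y) :: t)) ++ P = (Pp ++ [(x, y)]) ++ (t ++ P) := by
        simp [List.append_assoc]
      rwa [this] at h1
    have hclo' : ∀ c ∈ Pp ++ [(x, y)], ∀ d, OilOf n m g0 d → d ∈ nbrs c.1 c.2 →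
        d ∈ (Pp ++ [(x, y)]) ++ (t ++ P) := by
      intro c hc d hOd hdn
      rcases List.mem_append.1 hc with hc | hc
      · have := hclo c hc d hOd hdn
        rw [hmemeq]
        exact Or.inl this
      · have hcxy : c = (x, y) := by simpa using hc
        subst hcxy
        by_cases hdW : d ∈ W
        · exact absurd (hW d hdW (x, y) hOxy (nbrs_symm hdn)) hWxy
        · by_cases hdold : d ∈ Pp ++ ((x, y) :: t)
          · rw [hmemeq]
            exact Or.inl hdold
          · rw [hmemeq]
            refine Or.inr ((hPmem d).2 ⟨⟨hdn, hOd⟩, ?_⟩)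
            intro hmem2
            rcases List.mem_append.1 hmem2 with h | h
            · rcases List.mem_append.1 h with h | h
              · exact hdW h
              · exact hdold (List.mem_append.2 (Or.inl h))
            · exact hdold (List.mem_append.2 (Or.inr h))
    have hys' : ∀ col, col ∈ PySem.Set.add ys y ↔ ∃ c ∈ Pp ++ [(x, y)], c.2 = col := by
      intro col
      rw [PySem.Set.mem_add, hys col]
      constructor
      · intro h
        rcases h with ⟨c, hc, hcc⟩ | h
        · exact ⟨c, by simp [hc], hcc⟩
        · exact ⟨(x, y), by simp, h.symm⟩
      · rintro ⟨c, hc, hcc⟩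
        rcases List.mem_append.1 hc with h | h
        · exact Or.inl ⟨c, h, hcc⟩
        · have : c = (x, y) := by simpa using h
          subst this
          exact Or.inr hcc.symm
    have hysnd' : (PySem.Set.add ys y).Nodup := PySem.Set.nodup_add ys y hysnd
    have hmeas : ones (zeroAll g P) + (t ++ P).length < N := by
      have h1 := measure_step n m g x y
      rw [← hPdef] at h1
      simp only [List.length_append, List.length_cons] at hN ⊢
      omega
    obtain ⟨V, ys2, heq, hsub, hVnd, hVmem, hVclo, hys2, hys2nd⟩ :=
      IH (ones (zeroAll g P) + (t ++ P).length) hmeas (Pp ++ [(x, y)]) (t ++ P)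
        (PySem.Set.add ys y) (by rw [hgrid]) hmem' hnd' hclo' hys' hysnd'
    refine ⟨V, ys2, ?_, ?_, hVnd, hVmem, hVclo, hys2, hys2nd⟩
    · rw [← hgrid] at heq
      rw [← hoil] at heq
      simpa using heq
    · intro c hc
      exact hsub c ((hmemeq c).2 (Or.inl hc))

theorem seed_char (n m : Int) (g0 : List (List Int)) (W : List (Int × Int))
    (hW : ∀ c ∈ W, ∀ d, OilOf n m g0 d → d ∈ nbrs c.1 c.2 → d ∈ W)
    (s : Int × Int) (hs : OilOf n m g0 s) (hsW : s ∉ W) :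
    ∃ (V : List (Int × Int)) (ys' : PySem.Set Int),
      bfsA n m (zeroAll g0 (W ++ [s])) [s] 1 PySem.Set.empty =
        (zeroAll g0 (W ++ V), ((V.length : Int)), ys') ∧
      IsClass (OilOf n m g0) V ∧
      (∀ d, d ∈ V ↔ OilOf n m g0 d ∧ ConnP (OilOf n m g0) s d) ∧
      (∀ c ∈ V, c ∉ W) ∧
      (∀ col, col ∈ ys' ↔ ∃ c ∈ V, c.2 = col) ∧ ys'.Nodup ∧ 1 ≤ ((V.length : Int)) := by
  obtain ⟨V, ys', heq, hsub, hVnd, hVmem, hVclo, hysc, hysnd⟩ :=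
    bfs_char n m g0 W hW s (ones (zeroAll g0 (W ++ [] ++ [s])) + ([s] : List (Int × Int)).length)
      [] [s] PySem.Set.empty rfl
      (by
        intro c hc
        have : c = s := by simpa using hc
        subst this
        exact ⟨hs, Relation.ReflTransGen.refl, hsW⟩)
      (by simp)
      (by intro c hc; simp at hc)
      (by intro col; simp [PySem.Set.empty])
      (by simp [PySem.Set.empty])
  have hsV : s ∈ V := hsub s (by simp)
  have hchar : ∀ d, d ∈ V ↔ OilOf n m g0 d ∧ ConnP (OilOf n m g0) s d := by
    intro d
    constructor
    · intro hd
      exact ⟨(hVmem d hd).1, (hVmem d hd).2.1⟩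
    · rintro ⟨hOd, hconn⟩
      exact comp_closed hsV hVclo d hconn
  refine ⟨V, ys', ?_, isClass_of_char hsV hVnd hchar, hchar,
    fun c hc => (hVmem c hc).2.2, hysc, hysnd, ?_⟩
  · simpa using heq
  · have : V ≠ [] := by
      rintro rfl
      exact absurd hsV List.not_mem_nil
    have : 0 < V.length := List.length_pos_iff.2 this
    omega


-- ---------- A side: outer-scan invariant ----------

-- row-major prefix of the scan
def Pfix (i j : Int) (c : Int × Int) : Prop := c.1 < i ∨ (c.1 = i ∧ c.2 < j)

def InvA (n m : Int) (g0 : List (List Int)) (P : Int × Int → Prop)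
    (st : List (List Int) × PySem.Dict Int Int) : Prop :=
  ∃ LA : List (List (Int × Int)),
    (∀ C ∈ LA, IsClass (OilOf n m g0) C) ∧
    LA.Pairwise Disj ∧
    (∀ c, (∃ C ∈ LA, c ∈ C) ↔ (OilOf n m g0 c ∧ ∃ p, P p ∧ ConnP (OilOf n m g0) c p)) ∧
    st.1 = zeroAll g0 LA.flatten ∧
    DOK st.2 ∧ st.2.keys.Nodup ∧
    (∀ col, st.2.getD col 0 = (LA.map (fcol col)).sum)

theorem flatten_closed {n m : Int} {g0 : List (List Int)} {LA : List (List (Int × Int))}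
    (hcl : ∀ C ∈ LA, IsClass (OilOf n m g0) C) :
    ∀ c ∈ LA.flatten, ∀ d, OilOf n m g0 d → d ∈ nbrs c.1 c.2 → d ∈ LA.flatten := by
  intro c hc d hOd hdn
  obtain ⟨C, hC, hcC⟩ := List.mem_flatten.1 hc
  have hcls := hcl C hC
  have hOc := class_oil hcls hcC
  have hdC : d ∈ C := ((hcls.2.2 c hcC d).2 ⟨hOd, Relation.ReflTransGen.single ⟨hOc, hOd, hdn⟩⟩)
  exact List.mem_flatten.2 ⟨C, hC, hdC⟩

theorem InvA_congr {n m : Int} {g0 : List (List Int)} {P P' : Int × Int → Prop}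
    {st : List (List Int) × PySem.Dict Int Int}
    (hiff : ∀ p, OilOf n m g0 p → (P p ↔ P' p)) (h : InvA n m g0 P st) :
    InvA n m g0 P' st := by
  obtain ⟨LA, hcl, hpw, hcov, hgrid, hdok, hknd, hgetD⟩ := h
  refine ⟨LA, hcl, hpw, ?_, hgrid, hdok, hknd, hgetD⟩
  intro c
  rw [hcov c]
  constructor
  · rintro ⟨hO, p, hp, hconn⟩
    have hOp : OilOf n m g0 p := by
      rcases connP_cases hconn with rfl | ⟨_, h2⟩
      · exact hO
      · exact h2
    exact ⟨hO, p, (hiff p hOp).1 hp, hconn⟩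
  · rintro ⟨hO, p, hp, hconn⟩
    have hOp : OilOf n m g0 p := by
      rcases connP_cases hconn with rfl | ⟨_, h2⟩
      · exact hO
      · exact h2
    exact ⟨hO, p, (hiff p hOp).2 hp, hconn⟩

theorem count_nodup_ite (l : List Int) (h : l.Nodup) (a : Int) :
    l.count a = if a ∈ l then 1 else 0 := by
  by_cases ha : a ∈ l
  · rw [if_pos ha]
    exact List.count_eq_one_of_mem h ha
  · rw [if_neg ha]
    exact List.count_eq_zero.2 ha

theorem cellA_inv (n m : Int) (g0 : List (List Int)) (i j : Int)
    (hi : 0 ≤ i ∧ i < n) (hj : 0 ≤ j ∧ j < m) (P : Int × Int → Prop)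
    (st : List (List Int) × PySem.Dict Int Int) (h : InvA n m g0 P st) :
    InvA n m g0 (fun c => P c ∨ c = (i, j)) (cellA n m i st j) := by
  obtain ⟨LA, hcl, hpw, hcov, hgrid, hdok, hknd, hgetD⟩ := h
  unfold cellA
  by_cases hc : (gget st.1 (i, j) == 1) = true
  · rw [if_pos hc]
    simp only [beq_iff_eq] at hc
    rw [hgrid, gget_zeroAll] at hc
    have hzW : (i, j) ∉ LA.flatten ∧ gget g0 (i, j) = 1 := by
      by_cases hin : ((i, j) : Int × Int) ∈ LA.flatten
      · rw [if_pos hin] at hc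
        exact absurd hc (by norm_num)
      · rw [if_neg hin] at hc
        exact ⟨hin, hc⟩
    have hOz : OilOf n m g0 (i, j) := by
      unfold OilOf pOK
      simp only [Bool.and_eq_true, decide_eq_true_eq, beq_iff_eq]
      exact ⟨⟨⟨⟨hi.1, hi.2⟩, hj.1⟩, hj.2⟩, hzW.2⟩
    obtain ⟨V, ys', heq, hVclass, hVchar, hVW, hysc, hysnd, hVlen⟩ :=
      seed_char n m g0 LA.flatten (flatten_closed hcl) (i, j) hOz hzW.1
    have hgz : gzero st.1 (i, j) = zeroAll g0 (LA.flatten ++ [(i, j)]) := by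
      rw [hgrid, zeroAll_append]
      rfl
    rw [hgz, heq]
    have hdfold := dfold_char ((V.length : Int)) hVlen ys' st.2 hdok
    refine ⟨LA ++ [V], ?_, ?_, ?_, by simp [List.flatten_append], hdfold.1,
      hdfold.2.2.2 hknd, ?_⟩
    · intro C hC
      rcases List.mem_append.1 hC with h1 | h1
      · exact hcl C h1
      · have : C = V := by simpa using h1
        subst this
        exact hVclass
    · rw [List.pairwise_append]
      refine ⟨hpw, by simp, ?_⟩
      intro C hC D hD c hcC hcD
      have : D = V := by simpa using hD
      subst this
      exact hVW c hcD (List.mem_flatten.2 ⟨C, hC, hcC⟩)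
    · intro c
      constructor
      · rintro ⟨C, hC, hcC⟩
        rcases List.mem_append.1 hC with h1 | h1
        · obtain ⟨hO, p, hp, hconn⟩ := (hcov c).1 ⟨C, h1, hcC⟩
          exact ⟨hO, p, Or.inl hp, hconn⟩
        · have : C = V := by simpa using h1
          subst this
          obtain ⟨hO, hconn⟩ := (hVchar c).1 hcC
          exact ⟨hO, (i, j), Or.inr rfl, connP_symm hconn⟩
      · rintro ⟨hO, p, hp, hconn⟩
        rcases hp with hp | rfl
        · obtain ⟨C, hC, hcC⟩ := (hcov c).2 ⟨hO, p, hp, hconn⟩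
          exact ⟨C, List.mem_append.2 (Or.inl hC), hcC⟩
        · refine ⟨V, List.mem_append.2 (Or.inr (by simp)), ?_⟩
          exact (hVchar c).2 ⟨hO, connP_symm hconn⟩
    · intro col
      rw [hdfold.2.1 col, hgetD col, count_nodup_ite ys' hysnd col]
      have hite : (((if col ∈ ys' then (1 : Nat) else 0) : Nat) : Int) =
          (if ∃ c ∈ V, c.2 = col then (1 : Int) else 0) := by
        by_cases hcy : col ∈ ys'
        · rw [if_pos hcy, if_pos ((hysc col).1 hcy)]
          norm_num
        · rw [if_neg hcy, if_neg (fun he => hcy ((hysc col).2 he))]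
          norm_num
      rw [hite]
      simp only [List.map_append, List.sum_append, List.map_cons, List.map_nil, List.sum_cons,
        List.sum_nil, fcol]
      push_cast
      ring
  · rw [if_neg hc]
    simp only [beq_iff_eq] at hc
    rw [hgrid, gget_zeroAll] at hc
    refine ⟨LA, hcl, hpw, ?_, hgrid, hdok, hknd, hgetD⟩
    intro c
    rw [hcov c]
    constructor
    · rintro ⟨hO, p, hp, hconn⟩
      exact ⟨hO, p, Or.inl hp, hconn⟩
    · rintro ⟨hO, p, hp, hconn⟩
      rcases hp with hp | rfl
      · exact ⟨hO, p, hp, hconn⟩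
      · by_cases hin : ((i, j) : Int × Int) ∈ LA.flatten
        · obtain ⟨C, hC, hcC⟩ := List.mem_flatten.1 hin
          obtain ⟨hOz, p', hp', hconn'⟩ := (hcov (i, j)).1 ⟨C, hC, hcC⟩
          exact ⟨hO, p', hp', connP_trans hconn hconn'⟩
        · exfalso
          rw [if_neg hin] at hc
          have hnOz : ¬ OilOf n m g0 (i, j) := by
            intro hOz
            exact hc (pOK_gget hOz)
          rcases connP_cases hconn with h1 | ⟨_, h2⟩
          · exact hnOz (h1 ▸ hO)
          · exact hnOz h2

theorem innerA (n m : Int) (g0 : List (List Int)) (i : Int) (hi : 0 ≤ i ∧ i < n) :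
    ∀ (k : Nat) (j : Int) (st : List (List Int) × PySem.Dict Int Int),
    j + (k : Int) = m → 0 ≤ j →
    InvA n m g0 (Pfix i j) st →
    InvA n m g0 (Pfix i m) ((PySem.List.pyRange j m 1).foldl (cellA n m i) st)
  | 0, j, st, hk, hj, h => by
    have hjm : j = m := by omega
    subst hjm
    rw [PySem.List.pyRange_one_eq_nil (le_refl j)]
    simpa using h
  | (k+1), j, st, hk, hj, h => by
    have hjm : j < m := by omega
    rw [PySem.List.pyRange_one_cons hjm]
    simp only [List.foldl_cons]
    apply innerA n m g0 i hi k (j + 1) _ (by omega) (by omega)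
    have h2 := cellA_inv n m g0 i j hi ⟨hj, hjm⟩ (Pfix i j) st h
    apply InvA_congr _ h2
    intro p _
    rw [Prod.ext_iff]
    unfold Pfix
    simp only
    omega

theorem outerA (n m : Int) (g0 : List (List Int)) (hm : 0 ≤ m) :
    ∀ (k : Nat) (i : Int) (st : List (List Int) × PySem.Dict Int Int),
    i + (k : Int) = n → 0 ≤ i →
    InvA n m g0 (Pfix i 0) st →
    InvA n m g0 (Pfix n 0)
      ((PySem.List.pyRange i n 1).foldl
        (fun s i' => (PySem.List.pyRange 0 m 1).foldl (cellA n m i') s) st)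
  | 0, i, st, hk, hi, h => by
    have hin : i = n := by
      omega
    subst hin
    rw [PySem.List.pyRange_one_eq_nil (le_refl i)]
    simpa using h
  | (k+1), i, st, hk, hi, h => by
    have hin : i < n := by omega
    rw [PySem.List.pyRange_one_cons hin]
    simp only [List.foldl_cons]
    apply outerA n m g0 hm k (i + 1) _ (by omega) (by omega)
    have h2 := innerA n m g0 i ⟨hi, hin⟩ m.toNat 0 st (by omega) (le_refl 0) h
    apply InvA_congr _ h2
    intro p hOp
    have hb := pOK_bounds hOp
    unfold Pfix
    omega

theorem initA (n m : Int) (g0 : List (List Int)) :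
    InvA n m g0 (Pfix 0 0) (g0, (PySem.Dict.empty : PySem.Dict Int Int)) := by
  refine ⟨[], by simp, by simp, ?_, by simp [zeroAll_nil], ?_, by simp, by simp⟩
  · intro c
    simp only [List.not_mem_nil, false_and, exists_false, false_iff, not_exists, not_and]
    rintro hO p hp hconn
    have hOp : OilOf n m g0 p := by
      rcases connP_cases hconn with rfl | ⟨_, h2⟩
      · exact hO
      · exact h2
    have hb := pOK_bounds hOp
    unfold Pfix at hp
    omega
  · intro k
    constructor
    · simp [PySem.Dict.keys_empty, PySem.Dict.getD_empty]
    · simp [PySem.Dict.getD_empty]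


-- ---------- B side: adding one cell merges the classes of its processed neighbours ----------

theorem connP_insert_from_z {S S' : Int × Int → Prop} {z : Int × Int}
    (hS' : ∀ c, S' c ↔ S c ∨ c = z) {d : Int × Int} (h : ConnP S' z d) :
    d = z ∨ ∃ e, e ∈ nbrs z.1 z.2 ∧ S e ∧ ConnP S e d := by
  induction h with
  | refl => exact Or.inl rfl
  | @tail b c h1 hstep ih =>
    rcases ih with rfl | ⟨e, hen, hSe, hconn⟩
    · rcases (hS' _).1 hstep.2.1 with hSd | rfl
      · exact Or.inr ⟨c, hstep.2.2, hSd, Relation.ReflTransGen.refl⟩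
      · exact Or.inl rfl
    · rcases (hS' _).1 hstep.2.1 with hSd | rfl
      · have hSb : S b := by
          rcases connP_cases hconn with rfl | ⟨_, h2⟩
          · exact hSe
          · exact h2
        exact Or.inr ⟨e, hen, hSe, Relation.ReflTransGen.tail hconn ⟨hSb, hSd, hstep.2.2⟩⟩
      · exact Or.inl rfl

theorem connP_insert_start {S S' : Int × Int → Prop} {z : Int × Int}
    (hS' : ∀ c, S' c ↔ S c ∨ c = z) (hz : ¬ S z) {a d : Int × Int} (ha : S a)
    (h : ConnP S' a d) :
    ConnP S a d ∨ ((∃ e, e ∈ nbrs z.1 z.2 ∧ S e ∧ ConnP S a e) ∧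
      (d = z ∨ ∃ e, e ∈ nbrs z.1 z.2 ∧ S e ∧ ConnP S e d)) := by
  induction h with
  | refl => exact Or.inl Relation.ReflTransGen.refl
  | @tail b c h1 hstep ih =>
    rcases ih with hconn | ⟨hreach, hd⟩
    · have hSb : S b := by
        rcases connP_cases hconn with rfl | ⟨_, h2⟩
        · exact ha
        · exact h2
      rcases (hS' _).1 hstep.2.1 with hSd | rfl
      · exact Or.inl (Relation.ReflTransGen.tail hconn ⟨hSb, hSd, hstep.2.2⟩)
      · exact Or.inr ⟨⟨b, nbrs_symm hstep.2.2, hSb, hconn⟩, Or.inl rfl⟩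
    · rcases hd with rfl | ⟨e', hen', hSe', hconn'⟩
      · rcases (hS' _).1 hstep.2.1 with hSd | rfl
        · exact Or.inr ⟨hreach, Or.inr ⟨c, hstep.2.2, hSd, Relation.ReflTransGen.refl⟩⟩
        · exact Or.inr ⟨hreach, Or.inl rfl⟩
      · rcases (hS' _).1 hstep.2.1 with hSd | rfl
        · have hSb : S b := by
            rcases connP_cases hconn' with rfl | ⟨_, h2⟩
            · exact hSe'
            · exact h2
          exact Or.inr ⟨hreach,
            Or.inr ⟨e', hen', hSe', Relation.ReflTransGen.tail hconn' ⟨hSb, hSd, hstep.2.2⟩⟩⟩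
        · exact Or.inr ⟨hreach, Or.inl rfl⟩

theorem mem_foldl_setAdd :
    ∀ (l : List (Int × Int)) (s : PySem.Set (Int × Int)) (x : Int × Int),
    x ∈ l.foldl PySem.Set.add s ↔ x ∈ s ∨ x ∈ l
  | [], s, x => by simp
  | c :: l, s, x => by
    simp only [List.foldl_cons]
    rw [mem_foldl_setAdd l (PySem.Set.add s c) x, PySem.Set.mem_add]
    simp [List.mem_cons]
    tauto

theorem nodup_foldl_setAdd :
    ∀ (l : List (Int × Int)) (s : PySem.Set (Int × Int)), s.Nodup →
    (l.foldl PySem.Set.add s).Nodup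
  | [], s, h => h
  | c :: l, s, h => by
    simp only [List.foldl_cons]
    exact nodup_foldl_setAdd l (PySem.Set.add s c) (PySem.Set.nodup_add s c h)

theorem mergeFold (i j : Int) :
    ∀ (comps : List (List (Int × Int))) (s : PySem.Set (Int × Int) × List (List (Int × Int))),
    ((comps.foldl (mergeStep i j) s).2 =
      s.2 ++ comps.filter (fun C => decide (¬ ((i - 1, j) ∈ C ∨ (i, j - 1) ∈ C)))) ∧
    (∀ x, x ∈ (comps.foldl (mergeStep i j) s).1 ↔
      x ∈ s.1 ∨ ∃ C ∈ comps, ((i - 1, j) ∈ C ∨ (i, j - 1) ∈ C) ∧ x ∈ C) ∧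
    (s.1.Nodup → (comps.foldl (mergeStep i j) s).1.Nodup)
  | [], s => by
    refine ⟨by simp, ?_, fun h => h⟩
    intro x
    simp
  | C :: comps, s => by
    simp only [List.foldl_cons, List.filter_cons]
    by_cases ht : ((i - 1, j) ∈ C ∨ (i, j - 1) ∈ C)
    · rw [mergeStep, if_pos ht]
      have ih := mergeFold i j comps (C.foldl PySem.Set.add s.1, s.2)
      simp only [decide_not] at ih ⊢
      rw [decide_eq_true ht]
      refine ⟨by simpa using ih.1, ?_, fun h => ih.2.2 (nodup_foldl_setAdd C s.1 h)⟩
      intro x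
      rw [ih.2.1 x]
      simp only [mem_foldl_setAdd]
      constructor
      · rintro ((h | h) | ⟨D, hD, hDt, hxD⟩)
        · exact Or.inl h
        · exact Or.inr ⟨C, List.mem_cons_self, ht, h⟩
        · exact Or.inr ⟨D, List.mem_cons_of_mem C hD, hDt, hxD⟩
      · rintro (h | ⟨D, hD, hDt, hxD⟩)
        · exact Or.inl (Or.inl h)
        · rcases List.mem_cons.1 hD with rfl | hD
          · exact Or.inl (Or.inr hxD)
          · exact Or.inr ⟨D, hD, hDt, hxD⟩
    · rw [mergeStep, if_neg ht]
      have ih := mergeFold i j comps (s.1, s.2 ++ [C])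
      simp only [decide_not] at ih ⊢
      rw [decide_eq_false ht]
      refine ⟨by simpa [List.append_assoc] using ih.1, ?_, ih.2.2⟩
      intro x
      rw [ih.2.1 x]
      constructor
      · rintro (h | ⟨D, hD, hDt, hxD⟩)
        · exact Or.inl h
        · exact Or.inr ⟨D, List.mem_cons_of_mem C hD, hDt, hxD⟩
      · rintro (h | ⟨D, hD, hDt, hxD⟩)
        · exact Or.inl h
        · rcases List.mem_cons.1 hD with rfl | hD
          · exact absurd hDt ht
          · exact Or.inr ⟨D, hD, hDt, hxD⟩

def InvB (n m : Int) (g0 : List (List Int)) (P : Int × Int → Prop)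
    (st : List (List Int) × List (List (Int × Int))) : Prop :=
  (∀ C ∈ st.2, IsClass (fun c => OilOf n m g0 c ∧ P c) C) ∧
  st.2.Pairwise Disj ∧
  (∀ c, (∃ C ∈ st.2, c ∈ C) ↔ (OilOf n m g0 c ∧ P c)) ∧
  st.1 = zeroAll g0 st.2.flatten

theorem InvB_congr {n m : Int} {g0 : List (List Int)} {P P' : Int × Int → Prop}
    {st : List (List Int) × List (List (Int × Int))}
    (hiff : ∀ c, (OilOf n m g0 c ∧ P c) ↔ (OilOf n m g0 c ∧ P' c)) (h : InvB n m g0 P st) :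
    InvB n m g0 P' st := by
  obtain ⟨hcls, hpw, hcov, hgrid⟩ := h
  refine ⟨fun C hC => isClass_congr hiff (hcls C hC), hpw, ?_, hgrid⟩
  intro c
  rw [hcov c, hiff c]

theorem not_pfix_self (i j : Int) : ¬ Pfix i j (i, j) := by
  unfold Pfix
  simp only
  omega

theorem nbr_pfix (i j : Int) (e : Int × Int) (hen : e ∈ nbrs i j) (hP : Pfix i j e) :
    e = (i - 1, j) ∨ e = (i, j - 1) := by
  have := (mem_nbrs_iff (i, j) e).1 hen
  simp only at this
  rcases this with rfl | rfl | rfl | rfl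
  · exact Or.inl rfl
  · exact Or.inr rfl
  · exfalso
    unfold Pfix at hP
    simp only at hP
    omega
  · exfalso
    unfold Pfix at hP
    simp only at hP
    omega

theorem cellB_inv (n m : Int) (g0 : List (List Int)) (i j : Int)
    (hi : 0 ≤ i ∧ i < n) (hj : 0 ≤ j ∧ j < m)
    (st : List (List Int) × List (List (Int × Int))) (h : InvB n m g0 (Pfix i j) st) :
    InvB n m g0 (fun c => Pfix i j c ∨ c = (i, j)) (cellB i st j) := by
  obtain ⟨hcls, hpw, hcov, hgrid⟩ := h
  unfold cellB
  by_cases hc : (gget st.1 (i, j) == 1) = true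
  · rw [if_pos hc]
    simp only [beq_iff_eq] at hc
    rw [hgrid, gget_zeroAll] at hc
    have hzF : ((i, j) : Int × Int) ∉ st.2.flatten ∧ gget g0 (i, j) = 1 := by
      by_cases hin : ((i, j) : Int × Int) ∈ st.2.flatten
      · rw [if_pos hin] at hc
        exact absurd hc (by norm_num)
      · rw [if_neg hin] at hc
        exact ⟨hin, hc⟩
    have hOz : OilOf n m g0 (i, j) := by
      unfold OilOf pOK
      simp only [Bool.and_eq_true, decide_eq_true_eq, beq_iff_eq]
      exact ⟨⟨⟨⟨hi.1, hi.2⟩, hj.1⟩, hj.2⟩, hzF.2⟩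
    have hS'iff : ∀ c, (OilOf n m g0 c ∧ (Pfix i j c ∨ c = (i, j))) ↔
        ((OilOf n m g0 c ∧ Pfix i j c) ∨ c = (i, j)) := by
      intro c
      constructor
      · rintro ⟨hO, hP | rfl⟩
        · exact Or.inl ⟨hO, hP⟩
        · exact Or.inr rfl
      · rintro (⟨hO, hP⟩ | rfl)
        · exact ⟨hO, Or.inl hP⟩
        · exact ⟨hOz, Or.inr rfl⟩
    have hSz : ¬ (OilOf n m g0 (i, j) ∧ Pfix i j (i, j)) := fun hS =>
      not_pfix_self i j hS.2
    have mf := mergeFold i j st.2 (PySem.Set.ofList [(i, j)], [])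
    have hm0 : ∀ x : Int × Int, x ∈ PySem.Set.ofList [((i, j) : Int × Int)] ↔ x = (i, j) := by
      intro x
      rw [PySem.Set.mem_ofList]
      simp
    have hMmem : ∀ x, x ∈ (st.2.foldl (mergeStep i j) (PySem.Set.ofList [(i, j)], [])).1 ↔
        x = (i, j) ∨ ∃ C ∈ st.2, ((i - 1, j) ∈ C ∨ (i, j - 1) ∈ C) ∧ x ∈ C := by
      intro x
      rw [mf.2.1 x, hm0 x]
    have hMnd : (st.2.foldl (mergeStep i j) (PySem.Set.ofList [(i, j)], [])).1.Nodup :=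
      mf.2.2 (PySem.Set.nodup_ofList _)
    have htouchS : ∀ C ∈ st.2, ((i - 1, j) ∈ C ∨ (i, j - 1) ∈ C) →
        ∃ e, e ∈ nbrs i j ∧ (OilOf n m g0 e ∧ Pfix i j e) ∧ e ∈ C := by
      intro C hC ht
      rcases ht with ht | ht
      · exact ⟨(i - 1, j), by simp [nbrs], class_oil (hcls C hC) ht, ht⟩
      · exact ⟨(i, j - 1), by simp [nbrs], class_oil (hcls C hC) ht, ht⟩
    have hMchar : ∀ d, d ∈ (st.2.foldl (mergeStep i j) (PySem.Set.ofList [(i, j)], [])).1 ↔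
        (OilOf n m g0 d ∧ (Pfix i j d ∨ d = (i, j))) ∧
          ConnP (fun c => OilOf n m g0 c ∧ (Pfix i j c ∨ c = (i, j))) (i, j) d := by
      intro d
      rw [hMmem d]
      constructor
      · rintro (rfl | ⟨C, hC, ht, hdC⟩)
        · exact ⟨⟨hOz, Or.inr rfl⟩, Relation.ReflTransGen.refl⟩
        · obtain ⟨e, hen, hSe, heC⟩ := htouchS C hC ht
          have hch := (hcls C hC).2.2 e heC d
          obtain ⟨hSd, hconn⟩ := hch.1 hdC
          refine ⟨⟨hSd.1, Or.inl hSd.2⟩, ?_⟩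
          refine connP_trans (Relation.ReflTransGen.single
            ⟨⟨hOz, Or.inr rfl⟩, ⟨hSe.1, Or.inl hSe.2⟩, hen⟩) ?_
          exact connP_mono (fun c hc => ⟨hc.1, Or.inl hc.2⟩) hconn
      · rintro ⟨hS'd, hconn⟩
        rcases connP_insert_from_z hS'iff hconn with rfl | ⟨e, hen, hSe, hconnED⟩
        · exact Or.inl rfl
        · simp only at hen
          obtain ⟨C, hC, heC⟩ := (hcov e).2 hSe
          have htC : (i - 1, j) ∈ C ∨ (i, j - 1) ∈ C := by
            rcases nbr_pfix i j e hen hSe.2 with rfl | rfl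
            · exact Or.inl heC
            · exact Or.inr heC
          have hSd : OilOf n m g0 d ∧ Pfix i j d := by
            rcases connP_cases hconnED with rfl | ⟨_, h2⟩
            · exact hSe
            · exact h2
          exact Or.inr ⟨C, hC, htC, ((hcls C hC).2.2 e heC d).2 ⟨hSd, hconnED⟩⟩
    have hzM : ((i, j) : Int × Int) ∈
        (st.2.foldl (mergeStep i j) (PySem.Set.ofList [(i, j)], [])).1 :=
      (hMmem (i, j)).2 (Or.inl rfl)
    have hMclass := isClass_of_char hzM hMnd hMchar
    have huntouched : ∀ C ∈ st.2, ¬ ((i - 1, j) ∈ C ∨ (i, j - 1) ∈ C) →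
        IsClass (fun c => OilOf n m g0 c ∧ (Pfix i j c ∨ c = (i, j))) C := by
      intro C hC hnt
      have hcls' := hcls C hC
      refine ⟨hcls'.1, hcls'.2.1, ?_⟩
      intro c hcC d
      have hSc := class_oil hcls' hcC
      constructor
      · intro hdC
        obtain ⟨hSd, hconn⟩ := ((hcls'.2.2 c hcC d).1 hdC)
        exact ⟨⟨hSd.1, Or.inl hSd.2⟩, connP_mono (fun x hx => ⟨hx.1, Or.inl hx.2⟩) hconn⟩
      · rintro ⟨hS'd, hconn⟩
        rcases connP_insert_start hS'iff hSz hSc hconn with hcd | ⟨⟨e, hen, hSe, hconnae⟩, _⟩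
        · have hSd : OilOf n m g0 d ∧ Pfix i j d := by
            rcases (hS'iff d).1 hS'd with hSd | rfl
            · exact hSd
            · exfalso
              rcases connP_cases hcd with rfl | ⟨_, h2⟩
              · exact hSz hSc
              · exact hSz h2
          exact (hcls'.2.2 c hcC d).2 ⟨hSd, hcd⟩
        · exfalso
          simp only at hen
          have heC : e ∈ C := (hcls'.2.2 c hcC e).2 ⟨hSe, hconnae⟩
          rcases nbr_pfix i j e hen hSe.2 with rfl | rfl
          · exact hnt (Or.inl heC)
          · exact hnt (Or.inr heC)
    have hrest : (st.2.foldl (mergeStep i j) (PySem.Set.ofList [(i, j)], [])).2 =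
        st.2.filter (fun C => decide (¬ ((i - 1, j) ∈ C ∨ (i, j - 1) ∈ C))) := by
      have := mf.1
      simpa using this
    refine ⟨?_, ?_, ?_, ?_⟩
    · intro C hC
      simp only [hrest] at hC
      rcases List.mem_append.1 hC with h1 | h1
      · have hmem := List.mem_filter.1 h1
        exact huntouched C hmem.1 (by simpa using hmem.2)
      · have : C = (st.2.foldl (mergeStep i j) (PySem.Set.ofList [(i, j)], [])).1 := by
          simpa using h1
        subst this
        exact hMclass
    · simp only [hrest]
      rw [List.pairwise_append]
      refine ⟨hpw.sublist List.filter_sublist, by simp, ?_⟩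
      intro C hC D hD c hcC hcD
      have : D = (st.2.foldl (mergeStep i j) (PySem.Set.ofList [(i, j)], [])).1 := by
        simpa using hD
      subst this
      have hmemf := List.mem_filter.1 hC
      have hnt : ¬ ((i - 1, j) ∈ C ∨ (i, j - 1) ∈ C) := by simpa using hmemf.2
      have hUC := huntouched C hmemf.1 hnt
      obtain ⟨hS'c, hconnzc⟩ := (hMchar c).1 hcD
      have hzC : ((i, j) : Int × Int) ∈ C :=
        (hUC.2.2 c hcC (i, j)).2 ⟨⟨hOz, Or.inr rfl⟩, connP_symm hconnzc⟩
      exact hSz (class_oil (hcls C hmemf.1) hzC)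
    · intro c
      simp only [hrest]
      constructor
      · rintro ⟨C, hC, hcC⟩
        rcases List.mem_append.1 hC with h1 | h1
        · have hmemf := List.mem_filter.1 h1
          have hSc := class_oil (hcls C hmemf.1) hcC
          exact ⟨hSc.1, Or.inl hSc.2⟩
        · have : C = (st.2.foldl (mergeStep i j) (PySem.Set.ofList [(i, j)], [])).1 := by
            simpa using h1
          subst this
          exact ((hMchar c).1 hcC).1
      · intro hS'c
        rcases (hS'iff c).1 hS'c with hSc | rfl
        · obtain ⟨C, hC, hcC⟩ := (hcov c).2 hSc
          by_cases ht : ((i - 1, j) ∈ C ∨ (i, j - 1) ∈ C)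
          · exact ⟨_, List.mem_append.2 (Or.inr (by simp)),
              (hMmem c).2 (Or.inr ⟨C, hC, ht, hcC⟩)⟩
          · exact ⟨C, List.mem_append.2 (Or.inl (List.mem_filter.2 ⟨hC, by simpa using ht⟩)),
              hcC⟩
        · exact ⟨_, List.mem_append.2 (Or.inr (by simp)), hzM⟩
    · have hgz : gzero st.1 (i, j) = zeroAll g0 (st.2.flatten ++ [(i, j)]) := by
        rw [hgrid, zeroAll_append]
        rfl
      rw [hgz]
      apply zeroAll_congr
      intro c
      constructor
      · intro hcm
        rcases List.mem_append.1 hcm with h1 | h1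
        · obtain ⟨C, hC, hcC⟩ := List.mem_flatten.1 h1
          by_cases ht : ((i - 1, j) ∈ C ∨ (i, j - 1) ∈ C)
          · refine List.mem_flatten.2 ⟨_, ?_, (hMmem c).2 (Or.inr ⟨C, hC, ht, hcC⟩)⟩
            simp [hrest]
          · refine List.mem_flatten.2 ⟨C, ?_, hcC⟩
            simp only [hrest]
            exact List.mem_append.2 (Or.inl (List.mem_filter.2 ⟨hC, by simpa using ht⟩))
        · have : c = (i, j) := by simpa using h1
          subst this
          refine List.mem_flatten.2 ⟨_, ?_, hzM⟩
          simp [hrest]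
      · intro hcm
        obtain ⟨C, hC, hcC⟩ := List.mem_flatten.1 hcm
        simp only [hrest] at hC
        rcases List.mem_append.1 hC with h1 | h1
        · exact List.mem_append.2 (Or.inl
            (List.mem_flatten.2 ⟨C, (List.mem_filter.1 h1).1, hcC⟩))
        · have : C = (st.2.foldl (mergeStep i j) (PySem.Set.ofList [(i, j)], [])).1 := by
            simpa using h1
          subst this
          rcases (hMmem c).1 hcC with rfl | ⟨D, hD, _, hcD⟩
          · exact List.mem_append.2 (Or.inr (by simp))
          · exact List.mem_append.2 (Or.inl (List.mem_flatten.2 ⟨D, hD, hcD⟩))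
  · rw [if_neg hc]
    simp only [beq_iff_eq] at hc
    rw [hgrid, gget_zeroAll] at hc
    have hzF : ((i, j) : Int × Int) ∉ st.2.flatten := by
      intro hin
      obtain ⟨C, hC, hcC⟩ := List.mem_flatten.1 hin
      exact not_pfix_self i j (class_oil (hcls C hC) hcC).2
    rw [if_neg hzF] at hc
    have hnOz : ¬ OilOf n m g0 (i, j) := fun hOz => hc (pOK_gget hOz)
    apply InvB_congr _ ⟨hcls, hpw, hcov, hgrid⟩
    intro c
    constructor
    · rintro ⟨hO, hP⟩
      exact ⟨hO, Or.inl hP⟩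
    · rintro ⟨hO, hP | rfl⟩
      · exact ⟨hO, hP⟩
      · exact absurd hO hnOz

theorem innerB (n m : Int) (g0 : List (List Int)) (i : Int) (hi : 0 ≤ i ∧ i < n) :
    ∀ (k : Nat) (j : Int) (st : List (List Int) × List (List (Int × Int))),
    j + (k : Int) = m → 0 ≤ j →
    InvB n m g0 (Pfix i j) st →
    InvB n m g0 (Pfix i m) ((PySem.List.pyRange j m 1).foldl (cellB i) st)
  | 0, j, st, hk, hj, h => by
    have hjm : j = m := by omega
    subst hjm
    rw [PySem.List.pyRange_one_eq_nil (le_refl j)]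
    simpa using h
  | (k+1), j, st, hk, hj, h => by
    have hjm : j < m := by omega
    rw [PySem.List.pyRange_one_cons hjm]
    simp only [List.foldl_cons]
    apply innerB n m g0 i hi k (j + 1) _ (by omega) (by omega)
    have h2 := cellB_inv n m g0 i j hi ⟨hj, hjm⟩ st h
    apply InvB_congr _ h2
    intro p
    rw [Prod.ext_iff]
    unfold Pfix
    simp only
    constructor
    · rintro ⟨hO, hP⟩
      exact ⟨hO, by omega⟩
    · rintro ⟨hO, hP⟩
      exact ⟨hO, by omega⟩

theorem outerB (n m : Int) (g0 : List (List Int)) (hm : 0 ≤ m) :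
    ∀ (k : Nat) (i : Int) (st : List (List Int) × List (List (Int × Int))),
    i + (k : Int) = n → 0 ≤ i →
    InvB n m g0 (Pfix i 0) st →
    InvB n m g0 (Pfix n 0)
      ((PySem.List.pyRange i n 1).foldl
        (fun s i' => (PySem.List.pyRange 0 m 1).foldl (cellB i') s) st)
  | 0, i, st, hk, hi, h => by
    have hin : i = n := by omega
    subst hin
    rw [PySem.List.pyRange_one_eq_nil (le_refl i)]
    simpa using h
  | (k+1), i, st, hk, hi, h => by
    have hin : i < n := by omega
    rw [PySem.List.pyRange_one_cons hin]
    simp only [List.foldl_cons]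
    apply outerB n m g0 hm k (i + 1) _ (by omega) (by omega)
    have h2 := innerB n m g0 i ⟨hi, hin⟩ m.toNat 0 st (by omega) (le_refl 0) h
    apply InvB_congr _ h2
    intro p
    constructor
    · rintro ⟨hO, hP⟩
      have hb := pOK_bounds hO
      refine ⟨hO, ?_⟩
      unfold Pfix at hP ⊢
      omega
    · rintro ⟨hO, hP⟩
      have hb := pOK_bounds hO
      refine ⟨hO, ?_⟩
      unfold Pfix at hP ⊢
      omega

theorem initB (n m : Int) (g0 : List (List Int)) :
    InvB n m g0 (Pfix 0 0) (g0, ([] : List (List (Int × Int)))) := by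
  refine ⟨by simp, by simp, ?_, by simp [zeroAll_nil]⟩
  intro c
  simp only [List.not_mem_nil, false_and, exists_false, false_iff, not_and]
  intro hO
  have hb := pOK_bounds hO
  unfold Pfix
  omega


-- ---------- B side: totals characterisation ----------

theorem mem_colsOf_aux :
    ∀ (C : List (Int × Int)) (s : PySem.Set Int) (col : Int),
    col ∈ C.foldl (fun s c => PySem.Set.add s c.2) s ↔ col ∈ s ∨ ∃ c ∈ C, c.2 = col
  | [], s, col => by simp
  | c :: C, s, col => by
    simp only [List.foldl_cons]
    rw [mem_colsOf_aux C (PySem.Set.add s c.2) col, PySem.Set.mem_add]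
    constructor
    · rintro ((h | h) | ⟨d, hd, hdc⟩)
      · exact Or.inl h
      · exact Or.inr ⟨c, List.mem_cons_self, h.symm⟩
      · exact Or.inr ⟨d, List.mem_cons_of_mem c hd, hdc⟩
    · rintro (h | ⟨d, hd, hdc⟩)
      · exact Or.inl (Or.inl h)
      · rcases List.mem_cons.1 hd with rfl | hd
        · exact Or.inl (Or.inr hdc.symm)
        · exact Or.inr ⟨d, hd, hdc⟩

theorem nodup_colsOf_aux :
    ∀ (C : List (Int × Int)) (s : PySem.Set Int), s.Nodup →
    (C.foldl (fun s c => PySem.Set.add s c.2) s).Nodup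
  | [], s, h => h
  | c :: C, s, h => by
    simp only [List.foldl_cons]
    exact nodup_colsOf_aux C (PySem.Set.add s c.2) (PySem.Set.nodup_add s c.2 h)

theorem mem_colsOf (C : List (Int × Int)) (col : Int) :
    col ∈ colsOf C ↔ ∃ c ∈ C, c.2 = col := by
  unfold colsOf
  rw [mem_colsOf_aux]
  simp [PySem.Set.empty]

theorem nodup_colsOf (C : List (Int × Int)) : (colsOf C).Nodup :=
  nodup_colsOf_aux C PySem.Set.empty (by simp [PySem.Set.empty])

theorem totalsFold_char :
    ∀ (comps : List (List (Int × Int))) (t : List Int),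
    (∀ C ∈ comps, ∀ c ∈ C, 0 ≤ c.2 ∧ c.2 < (t.length : Int)) →
    ((comps.foldl (fun t comp => (colsOf comp).foldl (tAgg ((comp.length : Int))) t) t).length
        = t.length) ∧
    (∀ jn : Nat, (comps.foldl
        (fun t comp => (colsOf comp).foldl (tAgg ((comp.length : Int))) t) t).getD jn 0 =
      t.getD jn 0 + (comps.map (fcol ((jn : Int)))).sum)
  | [], t, hb => by
    refine ⟨rfl, ?_⟩
    simp
  | C :: comps, t, hb => by
    simp only [List.foldl_cons]
    have hbC : ∀ col ∈ colsOf C, 0 ≤ col ∧ col < (t.length : Int) := by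
      intro col hcol
      obtain ⟨c, hc, rfl⟩ := (mem_colsOf C col).1 hcol
      exact hb C List.mem_cons_self c hc
    have ht := tfold_char ((C.length : Int)) (colsOf C) t hbC
    have ih := totalsFold_char comps ((colsOf C).foldl (tAgg ((C.length : Int))) t) (by
      intro D hD c hc
      rw [ht.1]
      exact hb D (List.mem_cons_of_mem C hD) c hc)
    refine ⟨by rw [ih.1, ht.1], ?_⟩
    intro jn
    rw [ih.2 jn, ht.2 jn, count_nodup_ite _ (nodup_colsOf C) ((jn : Int))]
    have hite : (((if ((jn : Int)) ∈ colsOf C then (1 : Nat) else 0) : Nat) : Int) =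
        (if ∃ c ∈ C, c.2 = ((jn : Int)) then (1 : Int) else 0) := by
      by_cases hcy : ((jn : Int)) ∈ colsOf C
      · rw [if_pos hcy, if_pos ((mem_colsOf C _).1 hcy)]
        norm_num
      · rw [if_neg hcy, if_neg (fun he => hcy ((mem_colsOf C _).2 he))]
        norm_num
    simp only [List.map_cons, List.sum_cons]
    rw [hite]
    unfold fcol
    push_cast
    ring


-- ===== VERDICT (by name: the statement is the Claim_ definition above) =====
theorem solution_spec : Claim_equal_solution := by
  intro land _ _
  unfold Spec_solution solution solution_alt
  set n : Int := (land.length : Int) with hndef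
  set m : Int := ((land.headD []).length : Int) with hmdef
  have hn0 : (0 : Int) ≤ n := by positivity
  have hm0 : (0 : Int) ≤ m := by positivity
  -- run the A-side invariant over the whole scan
  have hA : InvA n m land (Pfix n 0) (scanA land) := by
    unfold scanA
    exact outerA n m land hm0 n.toNat 0 (land, PySem.Dict.empty)
      (by simp [hndef]) (le_refl 0) (initA n m land)
  -- run the B-side invariant over the whole scan
  have hB : InvB n m land (Pfix n 0) (scanB land) := by
    unfold scanB
    exact outerB n m land hm0 n.toNat 0 (land, [])
      (by simp [hndef]) (le_refl 0) (initB n m land)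
  obtain ⟨LA, hAcls, hApw, hAcov, _, hdok, hknd, hgetD⟩ := hA
  obtain ⟨hBcls, hBpw, hBcov, _⟩ := hB
  -- at the end the prefix covers every oil cell
  have hfull : ∀ c, OilOf n m land c → Pfix n 0 c := by
    intro c hO
    have hb := pOK_bounds hO
    unfold Pfix
    omega
  have hAcov' : ∀ c, (∃ C ∈ LA, c ∈ C) ↔ OilOf n m land c := by
    intro c
    rw [hAcov c]
    constructor
    · rintro ⟨hO, _⟩
      exact hO
    · intro hO
      exact ⟨hO, c, hfull c hO, Relation.ReflTransGen.refl⟩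
  have hBiff : ∀ c, (OilOf n m land c ∧ Pfix n 0 c) ↔ OilOf n m land c := by
    intro c
    exact ⟨fun h => h.1, fun h => ⟨h, hfull c h⟩⟩
  have hBcls' : ∀ C ∈ (scanB land).2, IsClass (OilOf n m land) C :=
    fun C hC => isClass_congr hBiff (hBcls C hC)
  have hBcov' : ∀ c, (∃ C ∈ (scanB land).2, c ∈ C) ↔ OilOf n m land c := by
    intro c
    rw [hBcov c, hBiff c]
  -- oil cells of any class have columns within [0, m)
  have hBbound : ∀ C ∈ (scanB land).2, ∀ c ∈ C,
      0 ≤ c.2 ∧ c.2 < ((List.replicate m.toNat (0 : Int)).length : Int) := by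
    intro C hC c hc
    have hO := class_oil (hBcls' C hC) hc
    have hb := pOK_bounds hO
    simp only [List.length_replicate]
    omega
  have htot := totalsFold_char (scanB land).2 (List.replicate m.toNat (0 : Int)) hBbound
  -- the two families have the same per-column sums
  have hsums : ∀ col : Int, (LA.map (fcol col)).sum = ((scanB land).2.map (fcol col)).sum := by
    intro col
    exact famSum (OilOf n m land) (fcol col) (fun C C' h => fcol_perm col h) LA (scanB land).2
      hAcls hBcls' hApw hBpw (fun c => by rw [hAcov' c, hBcov' c])
  have hrel : DTRel m (scanA land).2 (totalsOf m (scanB land).2) := by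
    refine ⟨?_, hdok, hknd, ?_, ?_⟩
    · unfold totalsOf
      rw [htot.1]
      simp
    · intro k hk
      have hne := (hdok k).1.1 hk
      rw [hgetD k] at hne
      have hex : ∃ C ∈ LA, fcol k C ≠ 0 := by
        by_contra hno
        push_neg at hno
        exact hne (List.sum_eq_zero (by
          intro x hx
          obtain ⟨C, hC, rfl⟩ := List.mem_map.1 hx
          exact hno C hC))
      obtain ⟨C, hC, hfC⟩ := hex
      have hex2 : ∃ c ∈ C, c.2 = k := by
        by_contra hno
        unfold fcol at hfC
        rw [if_neg hno] at hfC
        simp at hfC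
      obtain ⟨c, hc, rfl⟩ := hex2
      have hO := class_oil (hAcls C hC) hc
      have hb := pOK_bounds hO
      exact ⟨hb.2.2.1, hb.2.2.2⟩
    · intro jn hjn
      unfold totalsOf
      rw [htot.2 jn, hgetD ((jn : Int)), hsums ((jn : Int)), getD_replicate_zero]
      ring
  exact final_eq m (scanA land).2 (totalsOf m (scanB land).2) hrel
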